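-- pv_equiv track=rewrite | github.com/bob8dod/Preparing_CodingTest | BaekJoon/BFS,DFS/P16234.py | solution
-- ===== SOURCE A (Python) =====
-- from collections import deque
--
-- di = [[0,1],[1,0],[0,-1],[-1,0]]
--
-- def bfs(n,l, r, i,j,visited,gmap):
--     q = deque([[i,j]])
--     check = []
--     result = 0
--     while q:
--         ci, cj = q.popleft()
--         check.append([ci,cj])
--         result += gmap[ci][cj]
--         for ti, tj in di:
--             ni, nj = ci+ti, cj+tj
--             if (0<=ni<n and 0<=nj<n) and not visited[ni][nj]\
--                     and l<=abs(gmap[ci][cj] - gmap[ni][nj])<=r: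
--                 visited[ni][nj] = 1
--                 q.append([ni,nj])
--
--     if len(check) == 1: return 0
--     else:
--         avg = result//len(check)
--         for ki,kj in check:
--             gmap[ki][kj] = avg
--         return 1
--
-- def solution(n, l, r, gmap):
--     answer = 0
--     while True:
--         visited = [[0 for _ in range(n)] for _ in range(n)]
--         check = 0
--         for i in range(n):
--             for j in range(n):
--                 if not visited[i][j]:
--                     visited[i][j] = 1
--                     if bfs(n,l, r, i,j,visited,gmap) : check = 1
--         if check: answer += 1
--         else: break
--
--     return answer
-- ===== SOURCE B (Python) =====
-- def solution(n, l, r, gmap):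
--     days = 0
--     while True:
--         parent = {}
--
--         def find(x):
--             while parent.get(x, x) != x:
--                 x = parent[x]
--             return x
--
--         def union(a, b):
--             ra, rb = find(a), find(b)
--             if ra < rb:
--                 parent[rb] = ra
--             elif rb < ra:
--                 parent[ra] = rb
--
--         for i in range(n):
--             for j in range(n):
--                 if j + 1 < n and l <= abs(gmap[i][j] - gmap[i][j + 1]) <= r:
--                     union(i * n + j, i * n + j + 1)
--                 if i + 1 < n and l <= abs(gmap[i][j] - gmap[i + 1][j]) <= r:
--                     union(i * n + j, (i + 1) * n + j)
--
--         sums = {}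
--         counts = {}
--         for i in range(n):
--             for j in range(n):
--                 root = find(i * n + j)
--                 sums[root] = sums.get(root, 0) + gmap[i][j]
--                 counts[root] = counts.get(root, 0) + 1
--
--         moved = False
--         for i in range(n):
--             for j in range(n):
--                 root = find(i * n + j)
--                 if counts.get(root, 0) >= 2:
--                     gmap[i][j] = sums.get(root, 0) // counts.get(root, 0)
--                     moved = True
--
--         if not moved:
--             break
--         days += 1
--     return days
-- ===== Notes on version B (the rewrite author's own statement) =====
-- stated objective: alternative
-- what changed: Each day is computed in three staged passes over a union-find instead of per-seed BFS flood fills: first every cell is unioned with its right and down neighbour when l <= |diff| <= r (linking the larger root under the smaller, parents held lazily in a dict), then one pass accumulates per-root sums and member counts into dicts, then one pass rewrites every cell of a root with count >= 2 to sum // count and sets the moved flag; A instead runs a BFS with a deque and a visited matrix from each unvisited seed and averages each component as soon as it is found.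
import Mathlib
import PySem

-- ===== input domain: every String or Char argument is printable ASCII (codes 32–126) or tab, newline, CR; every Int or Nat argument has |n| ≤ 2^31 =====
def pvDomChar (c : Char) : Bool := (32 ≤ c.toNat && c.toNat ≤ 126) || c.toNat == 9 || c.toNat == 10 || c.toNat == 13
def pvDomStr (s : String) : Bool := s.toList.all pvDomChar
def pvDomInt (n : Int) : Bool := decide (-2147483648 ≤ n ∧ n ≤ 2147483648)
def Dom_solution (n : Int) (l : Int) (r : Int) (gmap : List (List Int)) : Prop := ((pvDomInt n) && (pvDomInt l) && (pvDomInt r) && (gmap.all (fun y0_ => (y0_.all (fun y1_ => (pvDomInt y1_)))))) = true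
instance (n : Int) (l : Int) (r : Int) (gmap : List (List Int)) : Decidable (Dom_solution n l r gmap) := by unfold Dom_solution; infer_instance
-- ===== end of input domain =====

-- B replaces A's per-seed BFS flood fills by a per-day union-find built in three staged passes
-- (union right/down neighbours, accumulate per-root sums/counts, rewrite cells of roots with
-- count ≥ 2); return values agree — both Pythons also mutate gmap in place identically, the
-- theorems here are about the return value.

-- ===== PORT A =====
-- shared 2-D indexing helpers (indices reaching them are always ≥ 0 here; reads Python would
-- IndexError on are excluded by Pre_solution, so the .getD defaults are never the value used)
def g2 (m : List (List Int)) (i j : Int) : Int :=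
  (PySem.List.pyGet? ((PySem.List.pyGet? m i).getD []) j).getD 0

def s2 (m : List (List Int)) (i j : Int) (v : Int) : List (List Int) :=
  m.modify i.toNat (fun row => row.set j.toNat v)

def diA : List (Int × Int) := [(0, 1), (1, 0), (0, -1), (-1, 0)]

-- body of A's `for ti, tj in di:` loop (visited, q as the mutated pair)
def bfsNb (n l r : Int) (g : List (List Int)) (ci cj : Int)
    (p : List (List Int) × List (Int × Int)) (d : Int × Int) :
    List (List Int) × List (Int × Int) :=
  let ni := ci + d.1
  let nj := cj + d.2
  if (0 ≤ ni ∧ ni < n ∧ 0 ≤ nj ∧ nj < n) ∧ g2 p.1 ni nj = 0 ∧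
      l ≤ |g2 g ci cj - g2 g ni nj| ∧ |g2 g ci cj - g2 g ni nj| ≤ r
  then (s2 p.1 ni nj 1, p.2 ++ [(ni, nj)])
  else p

-- A's `while q:` loop; fuel only bounds the iteration count (each iteration pops one cell and every
-- cell is enqueued at most once, so n*n+1 iterations always suffice — the 0 branch is unreachable)
def bfsLoop (n l r : Int) (g : List (List Int)) :
    Nat → List (Int × Int) → List (Int × Int) → Int → List (List Int) →
    List (Int × Int) × Int × List (List Int)
  | 0, _, check, result, visited => (check, result, visited)
  | _ + 1, [], check, result, visited => (check, result, visited)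
  | fuel + 1, c :: q, check, result, visited =>
    let check' := check ++ [c]
    let result' := result + g2 g c.1 c.2
    let p := diA.foldl (bfsNb n l r g c.1 c.2) (visited, q)
    bfsLoop n l r g fuel p.2 check' result' p.1

-- A's bfs(): returns (0/1 flag, visited, gmap) — the two Python in-place mutations made explicit
def bfsA (n l r i j : Int) (visited gmap : List (List Int)) :
    Int × List (List Int) × List (List Int) :=
  let t := bfsLoop n l r gmap (n.toNat * n.toNat + 1) [(i, j)] [] 0 visited
  if t.1.length = 1 then (0, t.2.2, gmap)
  else
    let avg := PySem.Int.floordiv t.2.1 (t.1.length : Int)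
    (1, t.2.2, t.1.foldl (fun m c => s2 m c.1 c.2 avg) gmap)

-- visited = [[0 for _ in range(n)] for _ in range(n)]
def mkVis (n : Int) : List (List Int) :=
  (PySem.List.pyRange 0 n 1).map (fun _ => (PySem.List.pyRange 0 n 1).map (fun _ => (0 : Int)))

-- one iteration of A's `while True:` body: returns (check flag, gmap)
def dayA (n l r : Int) (gmap : List (List Int)) : Int × List (List Int) :=
  let st := (PySem.List.pyRange 0 n 1).foldl (fun st i =>
    (PySem.List.pyRange 0 n 1).foldl
      (fun (st : List (List Int) × Int × List (List Int)) j =>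
        if g2 st.1 i j = 0 then
          let visited := s2 st.1 i j 1
          let t := bfsA n l r i j visited st.2.2
          (t.2.1, if t.1 ≠ 0 then 1 else st.2.1, t.2.2)
        else st) st) (mkVis n, 0, gmap)
  (st.2.1, st.2.2)

-- A's `while True:` day loop; the fuel n²·2⁶⁴+2 bounds the number of days: on every input admitted by
-- Dom_solution ∧ Pre_solution the Python loop exits earlier, so the 0 branch is unreachable there
def loopA (n l r : Int) : Nat → Int → List (List Int) → Int
  | 0, answer, _ => answer
  | fuel + 1, answer, gmap =>
    let t := dayA n l r gmap
    if t.1 ≠ 0 then loopA n l r fuel (answer + 1) t.2 else answer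

def solution (n : Int) (l : Int) (r : Int) (gmap : List (List Int)) : Int :=
  loopA n l r (n.toNat * n.toNat * 18446744073709551616 + 2) 0 gmap

-- ===== PORT B =====
-- B: per day, a union-find over all n*n cells, built and used in three staged passes.

-- B's find(): `while parent.get(x, x) != x: x = parent[x]`; the fuel x+1 only bounds the
-- iteration count (stored parents are always smaller nonnegative keys, so chains are shorter)
def findB (p : PySem.Dict Int Int) : Nat → Int → Int
  | 0, x => x
  | fuel + 1, x =>
    let px := p.getD x x
    if px = x then x else findB p fuel px

-- B's union: link the larger root under the smaller
def unionB (p : PySem.Dict Int Int) (a b : Int) : PySem.Dict Int Int :=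
  let ra := findB p (a.toNat + 1) a
  let rb := findB p (b.toNat + 1) b
  if ra < rb then p.insert rb ra
  else if rb < ra then p.insert ra rb
  else p

-- pass 1: parent = {}; union right/down neighbours within [l, r]
def buildP (n l r : Int) (g : List (List Int)) : PySem.Dict Int Int :=
  (PySem.List.pyRange 0 n 1).foldl (fun p i =>
    (PySem.List.pyRange 0 n 1).foldl (fun (p : PySem.Dict Int Int) j =>
      let p1 := if j + 1 < n ∧ l ≤ |g2 g i j - g2 g i (j + 1)| ∧ |g2 g i j - g2 g i (j + 1)| ≤ r
                then unionB p (i * n + j) (i * n + j + 1) else p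
      if i + 1 < n ∧ l ≤ |g2 g i j - g2 g (i + 1) j| ∧ |g2 g i j - g2 g (i + 1) j| ≤ r
      then unionB p1 (i * n + j) ((i + 1) * n + j) else p1) p)
    PySem.Dict.empty

-- pass 2: sums/counts dicts keyed by root
def accSC (n : Int) (g : List (List Int)) (p : PySem.Dict Int Int) :
    PySem.Dict Int Int × PySem.Dict Int Int :=
  (PySem.List.pyRange 0 n 1).foldl (fun sc i =>
    (PySem.List.pyRange 0 n 1).foldl
      (fun (sc : PySem.Dict Int Int × PySem.Dict Int Int) j =>
        let root := findB p ((i * n + j).toNat + 1) (i * n + j)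
        (sc.1.insert root (sc.1.getD root 0 + g2 g i j),
         sc.2.insert root (sc.2.getD root 0 + 1))) sc)
    (PySem.Dict.empty, PySem.Dict.empty)

-- pass 3: rewrite every cell whose root has count ≥ 2; one day of B: returns (moved, gmap)
def dayB (n l r : Int) (gmap : List (List Int)) : Bool × List (List Int) :=
  let p := buildP n l r gmap
  let sc := accSC n gmap p
  (PySem.List.pyRange 0 n 1).foldl (fun st i =>
    (PySem.List.pyRange 0 n 1).foldl (fun (st : Bool × List (List Int)) j =>
      let root := findB p ((i * n + j).toNat + 1) (i * n + j)
      if 2 ≤ sc.2.getD root 0 then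
        (true, s2 st.2 i j (PySem.Int.floordiv (sc.1.getD root 0) (sc.2.getD root 0)))
      else st) st) (false, gmap)

-- B's day loop; same day-fuel remark as loopA
def loopB (n l r : Int) : Nat → Int → List (List Int) → Int
  | 0, days, _ => days
  | fuel + 1, days, gmap =>
    let t := dayB n l r gmap
    if t.1 then loopB n l r fuel (days + 1) t.2 else days

def solution_alt (n : Int) (l : Int) (r : Int) (gmap : List (List Int)) : Int :=
  loopB n l r (n.toNat * n.toNat * 18446744073709551616 + 2) 0 gmap

-- ===== PRECONDITION & SPEC =====
-- Pre_solution = exactly the inputs on which Python A returns: (shape) A reads gmap[i][j] for every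
-- 0 ≤ i,j < n, so the first n rows must exist and have length ≥ n (else IndexError); (termination)
-- if l ≤ 0 and some adjacent pair has |difference| ≤ r, that pair merges on day 1, becomes equal, and
-- then satisfies l ≤ 0 = |difference| ≤ r forever, so A loops forever; with l ≥ 1 (or no such pair)
-- A terminates. Nothing on which A returns a value is excluded.
def Pre_solution (n : Int) (l : Int) (r : Int) (gmap : List (List Int)) : Prop :=
  (n.toNat ≤ gmap.length ∧ ∀ row ∈ gmap.take n.toNat, n.toNat ≤ row.length) ∧
  (1 ≤ l ∨ ∀ i < n.toNat, ∀ j < n.toNat,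
      (j + 1 < n.toNat → r < |g2 gmap (i : Int) ((j : Int) + 1) - g2 gmap (i : Int) (j : Int)|) ∧
      (i + 1 < n.toNat → r < |g2 gmap ((i : Int) + 1) (j : Int) - g2 gmap (i : Int) (j : Int)|))
instance (n : Int) (l : Int) (r : Int) (gmap : List (List Int)) : Decidable (Pre_solution n l r gmap) := by
  unfold Pre_solution; infer_instance

def pvWitness_solution : Int × Int × Int × List (List Int) := (2, 1, 3, [[1, 3], [2, 10]])

def Spec_solution (n : Int) (l : Int) (r : Int) (gmap : List (List Int)) (out : Int) : Prop := out = solution_alt n l r gmap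
instance (n : Int) (l : Int) (r : Int) (gmap : List (List Int)) (out : Int) : Decidable (Spec_solution n l r gmap out) := by unfold Spec_solution; infer_instance

-- ===== CLAIM (what is proved, stated in full; the proofs are below) =====
def Claim_equal_solution : Prop := ∀ (n : Int) (l : Int) (r : Int) (gmap : List (List Int)), Dom_solution n l r gmap → Pre_solution n l r gmap → Spec_solution n l r gmap (solution n l r gmap)

-- ===== LEMMAS AND PROOFS =====

-- ---------- basic notions used only by the proofs ----------

abbrev inb (n : Int) (c : Int × Int) : Prop := 0 ≤ c.1 ∧ c.1 < n ∧ 0 ≤ c.2 ∧ c.2 < n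

-- the cells of the grid, row-major, as both day loops enumerate them
def cellsI (n : Int) : List (Int × Int) :=
  (PySem.List.pyRange 0 n 1).flatMap (fun i => (PySem.List.pyRange 0 n 1).map (fun j => (i, j)))

def ge (m : List (List Int)) (a b : Nat) : Int := ((m[a]?.getD [])[b]?.getD 0)

def gv (g : List (List Int)) (c : Int × Int) : Int := g2 g c.1 c.2

def adj4 (a b : Int × Int) : Prop :=
  b = (a.1, a.2 + 1) ∨ b = (a.1 + 1, a.2) ∨ b = (a.1, a.2 - 1) ∨ b = (a.1 - 1, a.2)

-- the day's movement graph: both endpoints in bounds, 4-adjacent, value gap within [l, r]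
def Eg (n l r : Int) (g : List (List Int)) (a b : Int × Int) : Prop :=
  inb n a ∧ adj4 a b ∧ inb n b ∧ l ≤ |gv g a - gv g b| ∧ |gv g a - gv g b| ≤ r

def Conn (n l r : Int) (g : List (List Int)) (a b : Int × Int) : Prop :=
  Relation.ReflTransGen (Eg n l r g) a b

-- A's BFS reachability with a blocking set
def Reach (n l r : Int) (g : List (List Int)) (V : Int × Int → Prop) (s c : Int × Int) : Prop :=
  Relation.ReflTransGen (fun a b => Eg n l r g a b ∧ ¬ V b) s c

-- shapes
def PreShape (n : Int) (g : List (List Int)) : Prop :=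
  n.toNat ≤ g.length ∧ ∀ a : Nat, a < n.toNat → n.toNat ≤ (g[a]?.getD []).length

def ShapeEq (g g' : List (List Int)) : Prop :=
  g'.length = g.length ∧ ∀ a : Nat, (g'[a]?.getD []).length = (g[a]?.getD []).length

def shapeV (N : Nat) (m : List (List Int)) : Prop :=
  m.length = N ∧ ∀ a < N, ((m[a]?).getD []).length = N

def binV (n : Int) (m : List (List Int)) : Prop :=
  ∀ c, inb n c → g2 m c.1 c.2 = 0 ∨ g2 m c.1 c.2 = 1

-- flat index and union-find root
def idxn (n : Int) (c : Int × Int) : Int := c.1 * n + c.2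

def rootC (p : PySem.Dict Int Int) (x : Int) : Int := findB p (x.toNat + 1) x

-- component of c w.r.t. a parent dict P (the union-find built from the day's start grid)
def compR (n : Int) (P : PySem.Dict Int Int) (c : Int × Int) : List (Int × Int) :=
  (cellsI n).filter (fun d => decide (rootC P (idxn n d) = rootC P (idxn n c)))

def sumR (n : Int) (P : PySem.Dict Int Int) (g : List (List Int)) (c : Int × Int) : Int :=
  ((compR n P c).map (gv g)).sum

-- what one day does to the grid, stated pointwise
def DayGrid (n : Int) (P : PySem.Dict Int Int) (g0 g' : List (List Int)) : Prop :=
  ShapeEq g0 g' ∧ ∀ a b : Nat,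
    ge g' a b =
      if inb n ((a : Int), (b : Int)) ∧ 2 ≤ (compR n P ((a : Int), (b : Int))).length then
        PySem.Int.floordiv (sumR n P g0 ((a : Int), (b : Int)))
          ((compR n P ((a : Int), (b : Int))).length : Int)
      else ge g0 a b

def DayMoved (n : Int) (P : PySem.Dict Int Int) : Prop :=
  ∃ c, inb n c ∧ 2 ≤ (compR n P c).length


-- ---------- list-of-cells facts ----------

lemma foldl_flatMap {α β σ : Type} (l : List α) (f : α → List β) (F : σ → β → σ) (init : σ) :
    ((l.flatMap f).foldl F init) = l.foldl (fun st a => (f a).foldl F st) init := by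
  induction l generalizing init with
  | nil => rfl
  | cons a t ih => simp [List.flatMap_cons, List.foldl_append, ih]

lemma foldl_cellsI {σ : Type} (n : Int) (F : σ → Int × Int → σ) (init : σ) :
    (PySem.List.pyRange 0 n 1).foldl (fun st i =>
      (PySem.List.pyRange 0 n 1).foldl (fun st j => F st (i, j)) st) init =
    (cellsI n).foldl F init := by
  unfold cellsI
  rw [foldl_flatMap]
  refine List.foldl_ext _ _ _ (fun st i _ => ?_)
  rw [List.foldl_map]

lemma mem_cellsI {n : Int} {c : Int × Int} : c ∈ cellsI n ↔ inb n c := by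
  unfold cellsI inb
  simp only [List.mem_flatMap, List.mem_map, PySem.List.mem_pyRange_one]
  constructor
  · rintro ⟨i, ⟨hi1, hi2⟩, j, ⟨hj1, hj2⟩, rfl⟩
    exact ⟨hi1, hi2, hj1, hj2⟩
  · rintro ⟨h1, h2, h3, h4⟩
    exact ⟨c.1, ⟨h1, h2⟩, c.2, ⟨h3, h4⟩, rfl⟩

lemma nodup_cellsI {n : Int} : (cellsI n).Nodup := by
  unfold cellsI
  refine List.nodup_flatMap.mpr ⟨?_, ?_⟩
  · intro i _
    exact List.Nodup.map (fun a b h => by simpa using h) (PySem.List.nodup_pyRange_one 0 n)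
  · refine List.Pairwise.imp ?_ (PySem.List.nodup_pyRange_one 0 n)
    intro a b hab
    simp only [List.disjoint_left, List.mem_map]
    rintro x ⟨u, _, rfl⟩ ⟨v, _, hx⟩
    have : b = a := by simpa using (congrArg Prod.fst hx)
    exact hab this.symm

lemma length_cellsI {n : Int} : (cellsI n).length = n.toNat * n.toNat := by
  unfold cellsI
  rw [List.length_flatMap]
  have h1 : (PySem.List.pyRange 0 n 1).length = n.toNat := by
    rw [PySem.List.length_pyRange_one]; norm_num
  calc ((PySem.List.pyRange 0 n 1).map
          (fun i => ((PySem.List.pyRange 0 n 1).map (fun j => (i, j))).length)).sum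
      = ((PySem.List.pyRange 0 n 1).map (fun _ => n.toNat)).sum := by
        congr 1
        refine List.map_congr_left (fun i _ => ?_)
        rw [List.length_map, h1]
    _ = n.toNat * n.toNat := by
        rw [List.map_const', List.sum_replicate, h1, smul_eq_mul]

-- counting helper: flipping one present element of a nodup list out of a filter drops the length by 1
lemma filter_flip_one {α : Type} (L : List α) (p p' : α → Bool) (e : α)
    (hnd : L.Nodup) (he : e ∈ L) (hp : p e = true) (hp' : p' e = false)
    (hagree : ∀ x ∈ L, x ≠ e → p' x = p x) :
    (L.filter p').length + 1 = (L.filter p).length := by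
  induction L with
  | nil => cases he
  | cons h t ih =>
    rcases List.mem_cons.mp he with rfl | het
    · have hnot : e ∉ t := (List.nodup_cons.mp hnd).1
      have : t.filter p' = t.filter p :=
        List.filter_congr (fun x hx =>
          hagree x (List.mem_cons_of_mem _ hx) (fun hxe => hnot (hxe ▸ hx)))
      simp [hp, hp', this]
    · have hne : h ≠ e := fun hh => (List.nodup_cons.mp hnd).1 (hh ▸ het)
      have := ih (List.nodup_cons.mp hnd).2 het
        (fun x hx hxe => hagree x (List.mem_cons_of_mem _ hx) hxe)
      by_cases hph : p h = true
      · simp [hph, hagree h List.mem_cons_self hne, this]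
      · simp only [Bool.not_eq_true] at hph
        simp [hph, hagree h List.mem_cons_self hne, this]

-- ---------- matrix get/set facts ----------

lemma g2_eq_ge {m : List (List Int)} {i j : Int} (hi : 0 ≤ i) (hj : 0 ≤ j) :
    g2 m i j = ge m i.toNat j.toNat := by
  unfold g2 ge
  have h1 : PySem.List.pyGet? m i = m[i.toNat]? := by
    have := PySem.List.pyGet?_natCast m i.toNat
    rwa [Int.toNat_of_nonneg hi] at this
  have h2 : PySem.List.pyGet? (m[i.toNat]?.getD []) j = (m[i.toNat]?.getD [])[j.toNat]? := by
    have := PySem.List.pyGet?_natCast (m[i.toNat]?.getD []) j.toNat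
    rwa [Int.toNat_of_nonneg hj] at this
  rw [h1, h2]

lemma s2_eq (m : List (List Int)) (i j : Int) (v : Int) :
    s2 m i j v = m.modify i.toNat (fun row => row.set j.toNat v) := rfl

lemma ge_modset_self {m : List (List Int)} {x y : Nat} {v : Int}
    (hx : x < m.length) (hy : y < (m[x]?.getD []).length) :
    ge (m.modify x (fun row => row.set y v)) x y = v := by
  unfold ge at *
  rw [List.getElem?_modify]
  rcases h : m[x]? with _ | row
  · rw [h] at hy; simp at hy
  · rw [h] at hy
    simp only [h, Option.map_eq_map, Option.map_some, Option.getD_some]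
    rw [if_true]
    simp only [Option.getD_some] at hy
    rw [List.getElem?_set]
    simp [hy]

lemma ge_modset_ne {m : List (List Int)} {x y a b : Nat} {v : Int}
    (hne : ¬(x = a ∧ y = b)) :
    ge (m.modify x (fun row => row.set y v)) a b = ge m a b := by
  unfold ge
  rw [List.getElem?_modify]
  by_cases hxa : x = a
  · subst hxa
    have hyb : y ≠ b := fun h => hne ⟨rfl, h⟩
    rcases h : m[x]? with _ | row
    · simp [h]
    · simp only [h, Option.map_eq_map, Option.map_some, Option.getD_some]
      rw [if_true]
      rw [List.getElem?_set, if_neg hyb]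
  · rcases h : m[a]? with _ | row <;> simp [hxa]

lemma shapeV_s2 {N : Nat} {m : List (List Int)} {i j v : Int} (h : shapeV N m) :
    shapeV N (s2 m i j v) := by
  obtain ⟨h1, h2⟩ := h
  refine ⟨by simp [s2, h1], ?_⟩
  intro a ha
  rw [s2_eq, List.getElem?_modify]
  by_cases hia : i.toNat = a
  · subst hia
    rcases hh : m[i.toNat]? with _ | row
    · simpa [hh] using h2 _ ha
    · have := h2 _ ha; rw [hh] at this; simpa using this
  · rcases hh : m[a]? with _ | row
    · simpa [hh, hia] using h2 _ ha
    · have := h2 _ ha; rw [hh] at this; simpa [hia] using this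

lemma shapeEq_s2 {m : List (List Int)} (i j v : Int) : ShapeEq m (s2 m i j v) := by
  refine ⟨by simp [s2], ?_⟩
  intro a
  rw [s2_eq, List.getElem?_modify]
  by_cases hia : i.toNat = a
  · subst hia
    rcases hh : m[i.toNat]? with _ | row <;> simp [hh]
  · rcases hh : m[a]? with _ | row <;> simp [hia, hh]

lemma shapeEq_refl (m : List (List Int)) : ShapeEq m m := ⟨rfl, fun _ => rfl⟩

lemma shapeEq_trans {a b c : List (List Int)} (h1 : ShapeEq a b) (h2 : ShapeEq b c) :
    ShapeEq a c := ⟨h2.1.trans h1.1, fun x => (h2.2 x).trans (h1.2 x)⟩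

lemma g2_s2_self {n : Int} {m : List (List Int)} {c : Int × Int} {v : Int}
    (hsh : shapeV n.toNat m) (hc : inb n c) :
    g2 (s2 m c.1 c.2 v) c.1 c.2 = v := by
  obtain ⟨hc1, hc2, hc3, hc4⟩ := hc
  rw [g2_eq_ge hc1 hc3, s2_eq]
  have hx : c.1.toNat < m.length := by rw [hsh.1]; omega
  have hy : c.2.toNat < (m[c.1.toNat]?.getD []).length := by
    rw [hsh.2 c.1.toNat (by omega)]; omega
  exact ge_modset_self hx hy

lemma g2_s2_ne {m : List (List Int)} {c d : Int × Int} {v : Int}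
    (hc1 : 0 ≤ c.1) (hc2 : 0 ≤ c.2) (hd1 : 0 ≤ d.1) (hd2 : 0 ≤ d.2) (hne : d ≠ c) :
    g2 (s2 m c.1 c.2 v) d.1 d.2 = g2 m d.1 d.2 := by
  rw [g2_eq_ge hd1 hd2, g2_eq_ge hd1 hd2, s2_eq]
  apply ge_modset_ne
  rintro ⟨h1, h2⟩
  exact hne (Prod.ext (by omega) (by omega))

lemma ge_s2_self {n : Int} {m : List (List Int)} {c : Int × Int} {v : Int}
    (hsh : PreShape n m) (hc : inb n c) :
    ge (s2 m c.1 c.2 v) c.1.toNat c.2.toNat = v := by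
  obtain ⟨hc1, hc2, hc3, hc4⟩ := hc
  rw [s2_eq]
  have hx : c.1.toNat < m.length := by have := hsh.1; omega
  have hy : c.2.toNat < (m[c.1.toNat]?.getD []).length := by
    have := hsh.2 c.1.toNat (by omega); omega
  exact ge_modset_self hx hy

lemma ge_s2_ne {m : List (List Int)} {c : Int × Int} {v : Int} {a b : Nat}
    (hc1 : 0 ≤ c.1) (hc2 : 0 ≤ c.2) (hne : ((a : Int), (b : Int)) ≠ c) :
    ge (s2 m c.1 c.2 v) a b = ge m a b := by
  rw [s2_eq]
  apply ge_modset_ne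
  rintro ⟨h1, h2⟩
  exact hne (Prod.ext (by simp; omega) (by simp; omega))

lemma preShape_of_shapeEq {n : Int} {g g' : List (List Int)}
    (h1 : PreShape n g) (h2 : ShapeEq g g') : PreShape n g' := by
  refine ⟨by rw [h2.1]; exact h1.1, fun a ha => ?_⟩
  rw [h2.2 a]; exact h1.2 a ha

-- ---------- graph facts ----------

lemma Eg_symm {n l r : Int} {g : List (List Int)} {a b : Int × Int} (h : Eg n l r g a b) :
    Eg n l r g b a := by
  obtain ⟨ha, hadj, hb, h1, h2⟩ := h
  refine ⟨hb, ?_, ha, by rw [abs_sub_comm]; exact h1, by rw [abs_sub_comm]; exact h2⟩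
  unfold adj4 at *
  rcases hadj with h | h | h | h <;> rw [h] <;> simp [Prod.ext_iff] <;> omega

lemma Conn_symm {n l r : Int} {g : List (List Int)} {a b : Int × Int}
    (h : Conn n l r g a b) : Conn n l r g b a := by
  induction h with
  | refl => exact Relation.ReflTransGen.refl
  | tail _ hstep ih =>
    exact Relation.ReflTransGen.trans (Relation.ReflTransGen.single (Eg_symm hstep)) ih

lemma Conn_trans {n l r : Int} {g : List (List Int)} {a b c : Int × Int}
    (h1 : Conn n l r g a b) (h2 : Conn n l r g b c) : Conn n l r g a c :=
  Relation.ReflTransGen.trans h1 h2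

lemma Reach_inb {n l r : Int} {g : List (List Int)} {V : Int × Int → Prop} {s c : Int × Int}
    (hs : inb n s) (h : Reach n l r g V s c) : inb n c := by
  induction h with
  | refl => exact hs
  | tail _ hstep _ => exact hstep.1.2.2.1

lemma adj4_of_diA {c b d : Int × Int} (hd : d ∈ diA) (hb : b = (c.1 + d.1, c.2 + d.2)) :
    adj4 c b := by
  unfold diA at hd
  unfold adj4
  rcases (by simpa using hd : d = (0, 1) ∨ d = (1, 0) ∨ d = (0, -1) ∨ d = (-1, 0)) with
    rfl | rfl | rfl | rfl <;> simp [hb, sub_eq_add_neg]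

lemma diA_of_adj4 {c b : Int × Int} (h : adj4 c b) :
    ∃ d ∈ diA, b = (c.1 + d.1, c.2 + d.2) := by
  unfold diA
  rcases h with h | h | h | h <;>
    [exact ⟨(0, 1), by simp, by simp [h]⟩; exact ⟨(1, 0), by simp, by simp [h]⟩;
     exact ⟨(0, -1), by simp, by simp [h, sub_eq_add_neg]⟩;
     exact ⟨(-1, 0), by simp, by simp [h, sub_eq_add_neg]⟩]

-- ---------- A: unvisited-cell counting for the BFS fuel ----------

def unvisA (n : Int) (m : List (List Int)) : Nat :=
  ((cellsI n).filter (fun c => decide (g2 m c.1 c.2 = 0))).length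

lemma unvisA_le (n : Int) (m : List (List Int)) : unvisA n m ≤ n.toNat * n.toNat := by
  unfold unvisA
  calc _ ≤ (cellsI n).length := List.length_filter_le _ _
  _ = _ := length_cellsI


-- ---------- A: one pass over the four directions ----------

lemma bfsNb_fold (n l r : Int) (g : List (List Int)) (a : Int × Int) (ds : List (Int × Int)) :
    ∀ (visited : List (List Int)) (q : List (Int × Int)),
      shapeV n.toNat visited → binV n visited →
      ∃ new : List (Int × Int),
        (ds.foldl (bfsNb n l r g a.1 a.2) (visited, q)).2 = q ++ new ∧
        new.Nodup ∧
        (∀ b ∈ new, (∃ d ∈ ds, b = (a.1 + d.1, a.2 + d.2)) ∧ inb n b ∧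
            l ≤ |gv g a - gv g b| ∧ |gv g a - gv g b| ≤ r ∧ g2 visited b.1 b.2 = 0) ∧
        (∀ c, inb n c →
          (g2 (ds.foldl (bfsNb n l r g a.1 a.2) (visited, q)).1 c.1 c.2 = 1 ↔
            g2 visited c.1 c.2 = 1 ∨ c ∈ new)) ∧
        shapeV n.toNat (ds.foldl (bfsNb n l r g a.1 a.2) (visited, q)).1 ∧
        binV n (ds.foldl (bfsNb n l r g a.1 a.2) (visited, q)).1 ∧
        (∀ d ∈ ds, ∀ b : Int × Int, b = (a.1 + d.1, a.2 + d.2) → inb n b →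
            l ≤ |gv g a - gv g b| → |gv g a - gv g b| ≤ r →
            g2 (ds.foldl (bfsNb n l r g a.1 a.2) (visited, q)).1 b.1 b.2 = 1) ∧
        unvisA n (ds.foldl (bfsNb n l r g a.1 a.2) (visited, q)).1 + new.length = unvisA n visited := by
  induction ds with
  | nil =>
    intro visited q hsh hbin
    exact ⟨[], by simp, List.nodup_nil, by simp, by simp, hsh, hbin, by simp, by simp⟩
  | cons d ds ih =>
    intro visited q hsh hbin
    rw [List.foldl_cons]
    set b : Int × Int := (a.1 + d.1, a.2 + d.2) with hb
    have hstep : bfsNb n l r g a.1 a.2 (visited, q) d =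
        if (0 ≤ b.1 ∧ b.1 < n ∧ 0 ≤ b.2 ∧ b.2 < n) ∧ g2 visited b.1 b.2 = 0 ∧
            l ≤ |g2 g a.1 a.2 - g2 g b.1 b.2| ∧ |g2 g a.1 a.2 - g2 g b.1 b.2| ≤ r
          then (s2 visited b.1 b.2 1, q ++ [b])
          else (visited, q) := rfl
    by_cases hcond : (0 ≤ b.1 ∧ b.1 < n ∧ 0 ≤ b.2 ∧ b.2 < n) ∧ g2 visited b.1 b.2 = 0 ∧
        l ≤ |g2 g a.1 a.2 - g2 g b.1 b.2| ∧ |g2 g a.1 a.2 - g2 g b.1 b.2| ≤ r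
    · rw [hstep, if_pos hcond]
      obtain ⟨hbnd, hb0, hl1, hl2⟩ := hcond
      have hbinb : inb n b := hbnd
      have hsh' : shapeV n.toNat (s2 visited b.1 b.2 1) := shapeV_s2 hsh
      have hmark : g2 (s2 visited b.1 b.2 1) b.1 b.2 = 1 := g2_s2_self hsh hbinb
      have hother : ∀ c : Int × Int, inb n c → c ≠ b →
          g2 (s2 visited b.1 b.2 1) c.1 c.2 = g2 visited c.1 c.2 := by
        intro c hc hne
        exact g2_s2_ne hbinb.1 hbinb.2.2.1 hc.1 hc.2.2.1 hne
      have hbin' : binV n (s2 visited b.1 b.2 1) := by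
        intro c hc
        by_cases hcb : c = b
        · subst hcb; right; exact hmark
        · rw [hother c hc hcb]; exact hbin c hc
      obtain ⟨new', h1, h2, h3, h4, h5, h6, h7, h8⟩ := ih (s2 visited b.1 b.2 1) (q ++ [b]) hsh' hbin'
      have hbnotnew : b ∉ new' := by
        intro hmem
        have := (h3 b hmem).2.2.2.2
        rw [hmark] at this; exact one_ne_zero this
      refine ⟨b :: new', ?_, ?_, ?_, ?_, h5, h6, ?_, ?_⟩
      · rw [h1]; simp
      · exact List.nodup_cons.mpr ⟨hbnotnew, h2⟩
      · intro x hx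
        rcases List.mem_cons.mp hx with rfl | hx'
        · exact ⟨⟨d, List.mem_cons_self, rfl⟩, hbinb, hl1, hl2, hb0⟩
        · obtain ⟨⟨d', hd', hbd'⟩, hxin, hxl1, hxl2, hx0⟩ := h3 x hx'
          refine ⟨⟨d', List.mem_cons_of_mem _ hd', hbd'⟩, hxin, hxl1, hxl2, ?_⟩
          by_cases hxb : x = b
          · subst hxb; rw [hmark] at hx0; exact absurd hx0 one_ne_zero
          · rw [hother x hxin hxb] at hx0; exact hx0
      · intro c hc
        rw [h4 c hc]
        by_cases hcb : c = b
        · subst hcb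
          simp [hmark, hbnotnew]
        · rw [hother c hc hcb]
          constructor
          · rintro (h | h)
            · exact Or.inl h
            · exact Or.inr (List.mem_cons_of_mem _ h)
          · rintro (h | h)
            · exact Or.inl h
            · rcases List.mem_cons.mp h with rfl | h'
              · exact absurd rfl hcb
              · exact Or.inr h'
      · intro d'' hd'' bb hbb hbin2 hbl1 hbl2
        rcases List.mem_cons.mp hd'' with rfl | hd's
        · have hbbb : bb = b := hbb
          subst hbbb
          rw [h4 b hbin2]
          exact Or.inl hmark
        · exact h7 d'' hd's bb hbb hbin2 hbl1 hbl2
      · have hcnt : unvisA n (s2 visited b.1 b.2 1) + 1 = unvisA n visited := by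
          apply filter_flip_one (cellsI n) _ _ b nodup_cellsI (mem_cellsI.mpr hbinb)
          · simp [hb0]
          · simp [hmark]
          · intro x hxL hxb
            have hxc : inb n x := mem_cellsI.mp hxL
            simp only [decide_eq_decide]
            rw [hother x hxc hxb]
        simp only [List.length_cons]
        omega
    · rw [hstep, if_neg hcond]
      obtain ⟨new', h1, h2, h3, h4, h5, h6, h7, h8⟩ := ih visited q hsh hbin
      refine ⟨new', h1, h2, ?_, h4, h5, h6, ?_, h8⟩
      · intro x hx
        obtain ⟨⟨d', hd', hbd'⟩, rest⟩ := h3 x hx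
        exact ⟨⟨d', List.mem_cons_of_mem _ hd', hbd'⟩, rest⟩
      · intro d'' hd'' bb hbb hbin2 hbl1 hbl2
        rcases List.mem_cons.mp hd'' with rfl | hd's
        · have hbbb : bb = b := hbb
          subst hbbb
          have hb1 : g2 visited b.1 b.2 = 1 := by
            rcases hbin b hbin2 with h0 | h1
            · exfalso; exact hcond ⟨hbin2, h0, hbl1, hbl2⟩
            · exact h1
          rw [h4 b hbin2]
          exact Or.inl hb1
        · exact h7 d'' hd's bb hbb hbin2 hbl1 hbl2

-- ---------- A: the BFS worklist invariant ----------

structure AInv (n l r : Int) (g : List (List Int)) (V0 : Int × Int → Prop) (s : Int × Int)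
    (q check : List (Int × Int)) (result : Int) (visited : List (List Int)) : Prop where
  hsh : shapeV n.toNat visited
  hbin : binV n visited
  hmk : ∀ c, inb n c → (g2 visited c.1 c.2 = 1 ↔ V0 c ∨ c ∈ check ∨ c ∈ q)
  hnd : (check ++ q).Nodup
  hC : ∀ c, c ∈ check ++ q → Reach n l r g V0 s c
  hcl : ∀ a ∈ check, ∀ b, Eg n l r g a b → ¬ V0 b → (b ∈ check ∨ b ∈ q)
  hs : s ∈ check ∨ s ∈ q
  hres : result = (check.map (gv g)).sum

lemma bfs_run (n l r : Int) (g : List (List Int)) (V0 : Int × Int → Prop) (s : Int × Int)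
    (hsinb : inb n s) :
    ∀ (fuel : Nat) (q check : List (Int × Int)) (result : Int) (visited : List (List Int)),
      AInv n l r g V0 s q check result visited →
      q.length + unvisA n visited ≤ fuel →
      AInv n l r g V0 s [] (bfsLoop n l r g fuel q check result visited).1
        (bfsLoop n l r g fuel q check result visited).2.1
        (bfsLoop n l r g fuel q check result visited).2.2 := by
  intro fuel
  induction fuel with
  | zero =>
    intro q check result visited hinv hfuel
    have hq : q = [] := List.eq_nil_of_length_eq_zero (by omega)
    subst hq
    exact hinv
  | succ fuel ih =>
    intro q check result visited hinv hfuel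
    match q with
    | [] => exact hinv
    | c :: q' =>
      obtain ⟨hsh, hbin, hmk, hnd, hC, hcl, hs, hres⟩ := hinv
      have hcC : Reach n l r g V0 s c := hC c (by simp)
      have hcinb : inb n c := Reach_inb hsinb hcC
      have hunf : bfsLoop n l r g (fuel + 1) (c :: q') check result visited =
          bfsLoop n l r g fuel (diA.foldl (bfsNb n l r g c.1 c.2) (visited, q')).2
            (check ++ [c]) (result + g2 g c.1 c.2)
            (diA.foldl (bfsNb n l r g c.1 c.2) (visited, q')).1 := rfl
      rw [hunf]
      obtain ⟨new, h1, h2, h3, h4, h5, h6, h7, h8⟩ := bfsNb_fold n l r g c diA visited q' hsh hbin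
      have hmarked : ∀ x, x ∈ check ++ c :: q' → g2 visited x.1 x.2 = 1 := by
        intro x hx
        have hxinb : inb n x := Reach_inb hsinb (hC x hx)
        refine (hmk x hxinb).mpr ?_
        rcases List.mem_append.mp hx with h | h
        · exact Or.inr (Or.inl h)
        · rcases List.mem_cons.mp h with rfl | h
          · exact Or.inr (Or.inr (List.mem_cons_self))
          · exact Or.inr (Or.inr (List.mem_cons_of_mem _ h))
      have hnewfresh : ∀ x ∈ new, x ∉ check ++ c :: q' := by
        intro x hxnew hxold
        have := (h3 x hxnew).2.2.2.2
        rw [hmarked x hxold] at this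
        exact one_ne_zero this
      have hnewV0 : ∀ x ∈ new, ¬ V0 x := by
        intro x hxnew hv
        have h0 := (h3 x hxnew).2.2.2.2
        have := (hmk x (h3 x hxnew).2.1).mpr (Or.inl hv)
        rw [h0] at this
        exact zero_ne_one this
      have hnewC : ∀ x ∈ new, Reach n l r g V0 s x := by
        intro x hxnew
        obtain ⟨⟨d, hd, hbd⟩, hxin, hxl1, hxl2, hx0⟩ := h3 x hxnew
        exact Relation.ReflTransGen.tail hcC
          ⟨⟨hcinb, adj4_of_diA hd hbd, hxin, hxl1, hxl2⟩, hnewV0 x hxnew⟩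
      have hq2 : (diA.foldl (bfsNb n l r g c.1 c.2) (visited, q')).2 = q' ++ new := h1
      rw [hq2]
      apply ih
      · refine ⟨h5, h6, ?_, ?_, ?_, ?_, ?_, ?_⟩
        · intro x hxinb
          rw [h4 x hxinb, hmk x hxinb]
          simp only [List.mem_append, List.mem_cons, List.mem_singleton]
          tauto
        · have base : ((check ++ c :: q') ++ new).Nodup :=
            List.nodup_append.mpr ⟨hnd, h2, fun a ha b hb hab => hnewfresh b hb (hab ▸ ha)⟩
          have : (check ++ [c]) ++ (q' ++ new) = (check ++ c :: q') ++ new := by simp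
          rw [this]
          exact base
        · intro x hx
          simp only [List.mem_append, List.mem_cons, List.mem_singleton] at hx
          rcases hx with (h | rfl | h0) | (h | h)
          · exact hC x (List.mem_append_left _ h)
          · exact hcC
          · cases h0
          · exact hC x (by simp [h])
          · exact hnewC x h
        · intro a ha b hEg hV0b
          simp only [List.mem_append, List.mem_singleton] at ha
          have hbinb : inb n b := hEg.2.2.1
          rcases ha with ha | rfl
          · rcases hcl a ha b hEg hV0b with h | h
            · exact Or.inl (List.mem_append_left _ h)
            · rcases List.mem_cons.mp h with rfl | h
              · exact Or.inl (List.mem_append_right _ (by simp))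
              · exact Or.inr (List.mem_append_left _ h)
          · obtain ⟨d, hd, hbd⟩ := diA_of_adj4 hEg.2.1
            have hmrk : g2 (diA.foldl (bfsNb n l r g a.1 a.2) (visited, q')).1 b.1 b.2 = 1 :=
              h7 d hd b hbd hbinb hEg.2.2.2.1 hEg.2.2.2.2
            rcases (h4 b hbinb).mp hmrk with hv | hnew
            · rcases (hmk b hbinb).mp hv with h | h | h
              · exact absurd h hV0b
              · exact Or.inl (List.mem_append_left _ h)
              · rcases List.mem_cons.mp h with rfl | h
                · exact Or.inl (List.mem_append_right _ (by simp))
                · exact Or.inr (List.mem_append_left _ h)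
            · exact Or.inr (List.mem_append_right _ hnew)
        · rcases hs with h | h
          · exact Or.inl (List.mem_append_left _ h)
          · rcases List.mem_cons.mp h with rfl | h
            · exact Or.inl (List.mem_append_right _ (by simp))
            · exact Or.inr (List.mem_append_left _ h)
        · simp [hres, gv]
      · have : (q' ++ new).length = q'.length + new.length := by simp
        simp only [List.length_cons] at hfuel
        omega

lemma AInv_final_mem {n l r : Int} {g : List (List Int)} {V0 : Int × Int → Prop}
    {s : Int × Int} {check : List (Int × Int)} {result : Int} {visited : List (List Int)}
    (hinv : AInv n l r g V0 s [] check result visited) :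
    ∀ c, c ∈ check ↔ Reach n l r g V0 s c := by
  intro c
  constructor
  · intro h
    exact hinv.hC c (by simpa using h)
  · intro h
    induction h with
    | refl => exact hinv.hs.resolve_right (by simp)
    | tail _ hstep ih =>
      rcases hinv.hcl _ ih _ hstep.1 hstep.2 with h | h
      · exact h
      · cases h

-- ---------- the fresh visited matrix ----------

lemma mkVis_eq (n : Int) :
    mkVis n = List.replicate n.toNat (List.replicate n.toNat (0 : Int)) := by
  unfold mkVis
  simp [List.map_const', PySem.List.length_pyRange_one]

lemma g2_mkVis (n : Int) (i j : Int) : g2 (mkVis n) i j = 0 := by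
  rw [mkVis_eq]
  unfold g2
  rcases h : PySem.List.pyGet? (List.replicate n.toNat (List.replicate n.toNat (0 : Int))) i with _ | row
  · simp [PySem.List.pyGet?]
  · have hrow : row = List.replicate n.toNat (0 : Int) := by
      have hmem := PySem.List.mem_of_pyGet?_eq_some _ h
      exact List.eq_of_mem_replicate hmem
    subst hrow
    rcases h2 : PySem.List.pyGet? (List.replicate n.toNat (0 : Int)) j with _ | x
    · simp [h2]
    · have := PySem.List.mem_of_pyGet?_eq_some _ h2
      simp [List.eq_of_mem_replicate this, h2]

lemma shapeV_mkVis (n : Int) : shapeV n.toNat (mkVis n) := by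
  refine ⟨by simp [mkVis_eq], ?_⟩
  intro a ha
  simp [mkVis_eq, List.getElem?_replicate, ha]


-- ---------- union-find: find/union correctness ----------

def pget (p : PySem.Dict Int Int) (x : Int) : Int := p.getD x x

lemma findB_unfold (p : PySem.Dict Int Int) (f : Nat) (x : Int) :
    findB p (f + 1) x = if pget p x = x then x else findB p f (pget p x) := rfl

def UFInv (p : PySem.Dict Int Int) : Prop :=
  ∀ x : Int, 0 ≤ x → 0 ≤ pget p x ∧ pget p x ≤ x

lemma findB_fuel {p : PySem.Dict Int Int} (h : UFInv p) :
    ∀ (k : Nat) (x : Int) (f g : Nat), x.toNat = k → 0 ≤ x →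
      x.toNat < f → x.toNat < g → findB p f x = findB p g x := by
  intro k
  induction k using Nat.strong_induction_on with
  | _ k ih =>
    intro x f g hk h0 hf hg
    match f, g with
    | f + 1, g + 1 =>
      rw [findB_unfold, findB_unfold]
      by_cases hroot : pget p x = x
      · simp [hroot]
      · rw [if_neg hroot, if_neg hroot]
        obtain ⟨hp0, hp1⟩ := h x h0
        have hlt : (pget p x).toNat < k := by omega
        exact ih _ hlt (pget p x) f g rfl hp0 (by omega) (by omega)

lemma findB_spec {p : PySem.Dict Int Int} (h : UFInv p) :
    ∀ (k : Nat) (x : Int) (f : Nat), x.toNat = k → 0 ≤ x →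
      x.toNat < f →
      pget p (findB p f x) = findB p f x ∧ 0 ≤ findB p f x ∧ findB p f x ≤ x := by
  intro k
  induction k using Nat.strong_induction_on with
  | _ k ih =>
    intro x f hk h0 hf
    match f with
    | f + 1 =>
      rw [findB_unfold]
      by_cases hroot : pget p x = x
      · simp [hroot, h0]
      · rw [if_neg hroot]
        obtain ⟨hp0, hp1⟩ := h x h0
        have hlt : (pget p x).toNat < k := by omega
        obtain ⟨ha, hb, hc⟩ := ih _ hlt (pget p x) f rfl hp0 (by omega)
        exact ⟨ha, hb, by omega⟩

lemma rootC_spec {p : PySem.Dict Int Int} (h : UFInv p) {x : Int} (h0 : 0 ≤ x) :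
    pget p (rootC p x) = rootC p x ∧ 0 ≤ rootC p x ∧ rootC p x ≤ x :=
  findB_spec h x.toNat x (x.toNat + 1) rfl h0 (by omega)

lemma rootC_step {p : PySem.Dict Int Int} (h : UFInv p) {x : Int} (h0 : 0 ≤ x) :
    rootC p x = if pget p x = x then x else rootC p (pget p x) := by
  unfold rootC
  rw [findB_unfold]
  by_cases hroot : pget p x = x
  · simp [hroot]
  · rw [if_neg hroot, if_neg hroot]
    obtain ⟨hp0, hp1⟩ := h x h0
    have hlt : pget p x < x := lt_of_le_of_ne hp1 hroot
    exact findB_fuel h (pget p x).toNat (pget p x) x.toNat ((pget p x).toNat + 1) rfl hp0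
      (by omega) (by omega)

lemma rootC_of_root {p : PySem.Dict Int Int} (h : UFInv p) {x : Int}
    (h0 : 0 ≤ x) (hr : pget p x = x) : rootC p x = x := by
  rw [rootC_step h h0, if_pos hr]

lemma pget_insert (p : PySem.Dict Int Int) (kb ra x : Int) :
    pget (p.insert kb ra) x = if x = kb then ra else pget p x := by
  unfold pget
  rw [PySem.Dict.getD_insert]

-- linking one root under a smaller root
lemma link_root {p : PySem.Dict Int Int} (h : UFInv p) {ra rb : Int}
    (hra0 : 0 ≤ ra) (hrarb : ra < rb)
    (hrb : pget p rb = rb) (hra : pget p ra = ra) :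
    UFInv (p.insert rb ra) ∧
    ∀ x : Int, 0 ≤ x →
      rootC (p.insert rb ra) x = if rootC p x = rb then ra else rootC p x := by
  have hinv' : UFInv (p.insert rb ra) := by
    intro x hx0
    rw [show pget (p.insert rb ra) x = if x = rb then ra else pget p x from pget_insert p rb ra x]
    by_cases hxe : x = rb
    · rw [if_pos hxe]; omega
    · rw [if_neg hxe]; exact h x hx0
  refine ⟨hinv', ?_⟩
  have main : ∀ (k : Nat) (x : Int), x.toNat = k → 0 ≤ x →
      rootC (p.insert rb ra) x = if rootC p x = rb then ra else rootC p x := by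
    intro k
    induction k using Nat.strong_induction_on with
    | _ k ih =>
      intro x hk hx0
      by_cases hxe : x = rb
      · have h1 : rootC p x = x := by
          rw [hxe]; exact rootC_of_root h (by omega) hrb
        rw [h1, if_pos hxe]
        have hpgx : pget (p.insert rb ra) x = ra := by rw [pget_insert, if_pos hxe]
        rw [rootC_step hinv' hx0, hpgx, if_neg (by omega)]
        apply rootC_of_root hinv' hra0
        rw [pget_insert, if_neg (by omega)]
        exact hra
      · by_cases hroot : pget p x = x
        · have h1 : rootC p x = x := rootC_of_root h hx0 hroot
          have h2 : rootC (p.insert rb ra) x = x := by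
            apply rootC_of_root hinv' hx0
            rw [pget_insert, if_neg hxe]
            exact hroot
          rw [h1, h2, if_neg hxe]
        · obtain ⟨hp0, hp1⟩ := h x hx0
          have hplt : pget p x < x := lt_of_le_of_ne hp1 hroot
          have hpgx : pget (p.insert rb ra) x = pget p x := by
            rw [pget_insert, if_neg hxe]
          have e1 : rootC (p.insert rb ra) x = rootC (p.insert rb ra) (pget p x) := by
            rw [rootC_step hinv' hx0, hpgx, if_neg hroot]
          have e2 : rootC p x = rootC p (pget p x) := by
            rw [rootC_step h hx0, if_neg hroot]
          rw [e1, e2]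
          exact ih (pget p x).toNat (by omega) (pget p x) rfl hp0
  intro x hx0
  exact main x.toNat x rfl hx0

-- the union step: merge the two classes, everything else unchanged
lemma union_root {p : PySem.Dict Int Int} (h : UFInv p) {a b : Int}
    (ha0 : 0 ≤ a) (hb0 : 0 ≤ b) :
    UFInv (unionB p a b) ∧
    ∀ x : Int, 0 ≤ x →
      rootC (unionB p a b) x =
        if rootC p x = rootC p a ∨ rootC p x = rootC p b then min (rootC p a) (rootC p b)
        else rootC p x := by
  obtain ⟨hafix, ha0', ha1'⟩ := rootC_spec h ha0
  obtain ⟨hbfix, hb0', hb1'⟩ := rootC_spec h hb0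
  have hrw : unionB p a b =
      if rootC p a < rootC p b then p.insert (rootC p b) (rootC p a)
      else if rootC p b < rootC p a then p.insert (rootC p a) (rootC p b)
      else p := rfl
  by_cases hab : rootC p a < rootC p b
  · rw [hrw, if_pos hab]
    obtain ⟨hinv', hform⟩ := link_root h ha0' hab hbfix hafix
    refine ⟨hinv', ?_⟩
    intro x hx0
    rw [hform x hx0]
    rcases eq_or_ne (rootC p x) (rootC p b) with hcase | hcase
    · rw [if_pos hcase, if_pos (Or.inr hcase), min_eq_left (by omega)]
    · rw [if_neg hcase]
      rcases eq_or_ne (rootC p x) (rootC p a) with hcase2 | hcase2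
      · rw [if_pos (Or.inl hcase2), min_eq_left (by omega), hcase2]
      · rw [if_neg (by tauto)]
  · rw [hrw, if_neg hab]
    by_cases hba : rootC p b < rootC p a
    · rw [if_pos hba]
      obtain ⟨hinv', hform⟩ := link_root h hb0' hba hafix hbfix
      refine ⟨hinv', ?_⟩
      intro x hx0
      rw [hform x hx0]
      rcases eq_or_ne (rootC p x) (rootC p a) with hcase | hcase
      · rw [if_pos hcase, if_pos (Or.inl hcase), min_eq_right (by omega)]
      · rw [if_neg hcase]
        rcases eq_or_ne (rootC p x) (rootC p b) with hcase2 | hcase2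
        · rw [if_pos (Or.inr hcase2), min_eq_right (by omega), hcase2]
        · rw [if_neg (by tauto)]
    · rw [if_neg hba]
      have heq : rootC p a = rootC p b := by omega
      refine ⟨h, ?_⟩
      intro x hx0
      rcases eq_or_ne (rootC p x) (rootC p a) with hcase | hcase
      · rw [if_pos (Or.inl hcase), ← heq, min_self, hcase]
      · rw [if_neg (by rw [← heq]; tauto)]

lemma union_mono {p : PySem.Dict Int Int} (h : UFInv p) {a b : Int}
    (ha0 : 0 ≤ a) (hb0 : 0 ≤ b)
    {x y : Int} (hx0 : 0 ≤ x) (hy0 : 0 ≤ y)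
    (hxy : rootC p x = rootC p y) :
    rootC (unionB p a b) x = rootC (unionB p a b) y := by
  obtain ⟨_, hform⟩ := union_root h ha0 hb0
  rw [hform x hx0, hform y hy0, hxy]

lemma union_merges {p : PySem.Dict Int Int} (h : UFInv p) {a b : Int}
    (ha0 : 0 ≤ a) (hb0 : 0 ≤ b) :
    rootC (unionB p a b) a = rootC (unionB p a b) b := by
  obtain ⟨_, hform⟩ := union_root h ha0 hb0
  rw [hform a ha0, hform b hb0, if_pos (Or.inl rfl), if_pos (Or.inr rfl)]

lemma union_back {p : PySem.Dict Int Int} (h : UFInv p) {a b : Int}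
    (ha0 : 0 ≤ a) (hb0 : 0 ≤ b)
    {x y : Int} (hx0 : 0 ≤ x) (hy0 : 0 ≤ y)
    (hxy : rootC (unionB p a b) x = rootC (unionB p a b) y) :
    rootC p x = rootC p y ∨
      ((rootC p x = rootC p a ∨ rootC p x = rootC p b) ∧
       (rootC p y = rootC p a ∨ rootC p y = rootC p b)) := by
  obtain ⟨_, hform⟩ := union_root h ha0 hb0
  rw [hform x hx0, hform y hy0] at hxy
  by_cases hx : rootC p x = rootC p a ∨ rootC p x = rootC p b
  · by_cases hy : rootC p y = rootC p a ∨ rootC p y = rootC p b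
    · exact Or.inr ⟨hx, hy⟩
    · rw [if_pos hx, if_neg hy] at hxy
      exfalso
      rcases min_choice (rootC p a) (rootC p b) with hm | hm <;> rw [hm] at hxy <;> tauto
  · by_cases hy : rootC p y = rootC p a ∨ rootC p y = rootC p b
    · rw [if_neg hx, if_pos hy] at hxy
      exfalso
      rcases min_choice (rootC p a) (rootC p b) with hm | hm <;> rw [hm] at hxy <;> tauto
    · rw [if_neg hx, if_neg hy] at hxy
      exact Or.inl hxy

-- the initial empty parent dict
lemma pget_empty (x : Int) : pget PySem.Dict.empty x = x := by
  unfold pget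
  rw [PySem.Dict.getD_empty]

lemma UFInv_empty : UFInv (PySem.Dict.empty : PySem.Dict Int Int) := by
  intro x hx0
  rw [pget_empty]
  omega

lemma rootC_empty (x : Int) (h0 : 0 ≤ x) :
    rootC (PySem.Dict.empty : PySem.Dict Int Int) x = x :=
  rootC_of_root UFInv_empty h0 (pget_empty x)

-- ---------- flat-index facts ----------

lemma idx_bound {n : Int} {c : Int × Int} (h : inb n c) :
    0 ≤ idxn n c ∧ idxn n c < n * n := by
  obtain ⟨h1, h2, h3, h4⟩ := h
  unfold idxn
  constructor
  · nlinarith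
  · nlinarith [mul_le_mul_of_nonneg_right (show c.1 ≤ n - 1 by omega) (show (0:Int) ≤ n by omega)]

lemma idx_inj {n : Int} {c d : Int × Int} (hc : inb n c) (hd : inb n d)
    (h : idxn n c = idxn n d) : c = d := by
  obtain ⟨a1, a2, a3, a4⟩ := hc
  obtain ⟨b1, b2, b3, b4⟩ := hd
  have hn : 0 < n := by omega
  unfold idxn at h
  have key : c.1 = d.1 := by
    by_contra hne
    rcases lt_or_gt_of_ne hne with hlt | hlt
    · have h5 : c.1 + 1 ≤ d.1 := by omega
      have h6 : (c.1 + 1) * n ≤ d.1 * n := mul_le_mul_of_nonneg_right h5 (le_of_lt hn)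
      nlinarith
    · have h5 : d.1 + 1 ≤ c.1 := by omega
      have h6 : (d.1 + 1) * n ≤ c.1 * n := mul_le_mul_of_nonneg_right h5 (le_of_lt hn)
      nlinarith
  refine Prod.ext key ?_
  rw [key] at h
  omega

-- ---------- the build pass ----------

def BSf (n l r : Int) (g : List (List Int)) (p : PySem.Dict Int Int) (c : Int × Int) :
    PySem.Dict Int Int :=
  let p1 := if c.2 + 1 < n ∧ l ≤ |g2 g c.1 c.2 - g2 g c.1 (c.2 + 1)| ∧
                |g2 g c.1 c.2 - g2 g c.1 (c.2 + 1)| ≤ r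
            then unionB p (c.1 * n + c.2) (c.1 * n + c.2 + 1) else p
  if c.1 + 1 < n ∧ l ≤ |g2 g c.1 c.2 - g2 g (c.1 + 1) c.2| ∧
      |g2 g c.1 c.2 - g2 g (c.1 + 1) c.2| ≤ r
  then unionB p1 (c.1 * n + c.2) ((c.1 + 1) * n + c.2) else p1

lemma buildP_eq (n l r : Int) (g : List (List Int)) :
    buildP n l r g = (cellsI n).foldl (BSf n l r g) PySem.Dict.empty := by
  unfold buildP
  exact foldl_cellsI n (BSf n l r g) _

def EdgeDone (n l r : Int) (g : List (List Int)) (P : PySem.Dict Int Int) (c : Int × Int) :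
    Prop :=
  ((c.2 + 1 < n ∧ l ≤ |g2 g c.1 c.2 - g2 g c.1 (c.2 + 1)| ∧
      |g2 g c.1 c.2 - g2 g c.1 (c.2 + 1)| ≤ r) →
    rootC P (idxn n c) = rootC P (idxn n c + 1)) ∧
  ((c.1 + 1 < n ∧ l ≤ |g2 g c.1 c.2 - g2 g (c.1 + 1) c.2| ∧
      |g2 g c.1 c.2 - g2 g (c.1 + 1) c.2| ≤ r) →
    rootC P (idxn n c) = rootC P (idxn n c + n))

def RelInv (n l r : Int) (g : List (List Int)) (p : PySem.Dict Int Int) : Prop :=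
  ∀ c d, inb n c → inb n d → rootC p (idxn n c) = rootC p (idxn n d) → Conn n l r g c d

-- one union along a genuine movement edge keeps the invariant
lemma union_edge_step {n l r : Int} {g : List (List Int)} {p : PySem.Dict Int Int}
    (hinv : UFInv p) (hrel : RelInv n l r g p)
    {u v : Int × Int} (hEg : Eg n l r g u v) :
    UFInv (unionB p (idxn n u) (idxn n v)) ∧
    RelInv n l r g (unionB p (idxn n u) (idxn n v)) ∧
    (∀ x y : Int, 0 ≤ x → 0 ≤ y → rootC p x = rootC p y →
      rootC (unionB p (idxn n u) (idxn n v)) x = rootC (unionB p (idxn n u) (idxn n v)) y) ∧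
    rootC (unionB p (idxn n u) (idxn n v)) (idxn n u) =
      rootC (unionB p (idxn n u) (idxn n v)) (idxn n v) := by
  have hu := hEg.1
  have hv := hEg.2.2.1
  obtain ⟨hu0, hu1⟩ := idx_bound hu
  obtain ⟨hv0, hv1⟩ := idx_bound hv
  have hCuv : Conn n l r g u v := Relation.ReflTransGen.single hEg
  obtain ⟨hinv', hform⟩ := union_root hinv hu0 hv0
  refine ⟨hinv', ?_, ?_, union_merges hinv hu0 hv0⟩
  · intro c d hc hd hroot
    obtain ⟨hc0, hc1⟩ := idx_bound hc
    obtain ⟨hd0, hd1⟩ := idx_bound hd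
    rcases union_back hinv hu0 hv0 hc0 hd0 hroot with hold | ⟨hcs, hds⟩
    · exact hrel c d hc hd hold
    · have hcc : Conn n l r g c v := by
        rcases hcs with hcu | hcv
        · exact Conn_trans (hrel c u hc hu hcu) hCuv
        · exact hrel c v hc hv hcv
      have hdd : Conn n l r g d v := by
        rcases hds with hdu | hdv
        · exact Conn_trans (hrel d u hd hu hdu) hCuv
        · exact hrel d v hd hv hdv
      exact Conn_trans hcc (Conn_symm hdd)
  · intro x y hx0 hy0 hxy
    exact union_mono hinv hu0 hv0 hx0 hy0 hxy

lemma bsf_step {n l r : Int} {g : List (List Int)} {p : PySem.Dict Int Int}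
    (hinv : UFInv p) (hrel : RelInv n l r g p) {c : Int × Int} (hc : inb n c) :
    UFInv (BSf n l r g p c) ∧
    RelInv n l r g (BSf n l r g p c) ∧
    (∀ x y : Int, 0 ≤ x → 0 ≤ y → rootC p x = rootC p y →
      rootC (BSf n l r g p c) x = rootC (BSf n l r g p c) y) ∧
    EdgeDone n l r g (BSf n l r g p c) c := by
  obtain ⟨hc0, hc1⟩ := idx_bound hc
  obtain ⟨hca, hcb, hcc, hcd⟩ := id hc
  by_cases hR : (c.2 + 1 < n ∧ l ≤ |g2 g c.1 c.2 - g2 g c.1 (c.2 + 1)| ∧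
      |g2 g c.1 c.2 - g2 g c.1 (c.2 + 1)| ≤ r)
  all_goals
    by_cases hD : (c.1 + 1 < n ∧ l ≤ |g2 g c.1 c.2 - g2 g (c.1 + 1) c.2| ∧
        |g2 g c.1 c.2 - g2 g (c.1 + 1) c.2| ≤ r)
  next =>
    have hEgR : Eg n l r g c (c.1, c.2 + 1) :=
      ⟨hc, Or.inl rfl, ⟨hca, hcb, by omega, by simpa using hR.1⟩,
        by simpa [gv] using hR.2.1, by simpa [gv] using hR.2.2⟩
    have hidxR : idxn n (c.1, c.2 + 1) = c.1 * n + c.2 + 1 := by unfold idxn; ring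
    have e1 : unionB p (c.1 * n + c.2) (c.1 * n + c.2 + 1) =
        unionB p (idxn n c) (idxn n (c.1, c.2 + 1)) := by rw [hidxR]; rfl
    obtain ⟨hinv1, hrel1, hmono1, hmerge1⟩ := union_edge_step hinv hrel hEgR
    set p1 := unionB p (idxn n c) (idxn n (c.1, c.2 + 1)) with hp1
    have hEgD : Eg n l r g c (c.1 + 1, c.2) :=
      ⟨hc, Or.inr (Or.inl rfl), ⟨by omega, by simpa using hD.1, hcc, hcd⟩,
        by simpa [gv] using hD.2.1, by simpa [gv] using hD.2.2⟩
    have e2 : unionB p1 (c.1 * n + c.2) ((c.1 + 1) * n + c.2) =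
        unionB p1 (idxn n c) (idxn n (c.1 + 1, c.2)) := rfl
    obtain ⟨hinv2, hrel2, hmono2, hmerge2⟩ := union_edge_step hinv1 hrel1 hEgD
    have hBSf : BSf n l r g p c = unionB p1 (idxn n c) (idxn n (c.1 + 1, c.2)) := by
      unfold BSf
      rw [if_pos hR, if_pos hD, e1, e2]
    rw [hBSf]
    obtain ⟨hr0, hr1⟩ := idx_bound hEgR.2.2.1
    refine ⟨hinv2, hrel2, ?_, ?_, ?_⟩
    · intro x y hx0 hy0 hxy
      exact hmono2 x y hx0 hy0 (hmono1 x y hx0 hy0 hxy)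
    · intro _
      rw [show idxn n c + 1 = idxn n (c.1, c.2 + 1) from by unfold idxn; ring]
      exact hmono2 _ _ hc0 hr0 hmerge1
    · intro _
      rw [show idxn n c + n = idxn n (c.1 + 1, c.2) from by unfold idxn; ring]
      exact hmerge2
  next =>
    have hEgR : Eg n l r g c (c.1, c.2 + 1) :=
      ⟨hc, Or.inl rfl, ⟨hca, hcb, by omega, by simpa using hR.1⟩,
        by simpa [gv] using hR.2.1, by simpa [gv] using hR.2.2⟩
    have hidxR : idxn n (c.1, c.2 + 1) = c.1 * n + c.2 + 1 := by unfold idxn; ring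
    have e1 : unionB p (c.1 * n + c.2) (c.1 * n + c.2 + 1) =
        unionB p (idxn n c) (idxn n (c.1, c.2 + 1)) := by rw [hidxR]; rfl
    obtain ⟨hinv1, hrel1, hmono1, hmerge1⟩ := union_edge_step hinv hrel hEgR
    have hBSf : BSf n l r g p c = unionB p (idxn n c) (idxn n (c.1, c.2 + 1)) := by
      unfold BSf
      rw [if_pos hR, if_neg hD, e1]
    rw [hBSf]
    refine ⟨hinv1, hrel1, hmono1, ?_, fun h => absurd h hD⟩
    intro _
    rw [show idxn n c + 1 = idxn n (c.1, c.2 + 1) from by unfold idxn; ring]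
    exact hmerge1
  next =>
    have hEgD : Eg n l r g c (c.1 + 1, c.2) :=
      ⟨hc, Or.inr (Or.inl rfl), ⟨by omega, by simpa using hD.1, hcc, hcd⟩,
        by simpa [gv] using hD.2.1, by simpa [gv] using hD.2.2⟩
    obtain ⟨hinv1, hrel1, hmono1, hmerge1⟩ := union_edge_step hinv hrel hEgD
    have hBSf : BSf n l r g p c = unionB p (idxn n c) (idxn n (c.1 + 1, c.2)) := by
      unfold BSf
      rw [if_neg hR, if_pos hD]
      rfl
    rw [hBSf]
    refine ⟨hinv1, hrel1, hmono1, fun h => absurd h hR, ?_⟩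
    intro _
    rw [show idxn n c + n = idxn n (c.1 + 1, c.2) from by unfold idxn; ring]
    exact hmerge1
  next =>
    have hBSf : BSf n l r g p c = p := by
      unfold BSf
      rw [if_neg hR, if_neg hD]
    rw [hBSf]
    exact ⟨hinv, hrel, fun x y _ _ h => h, fun h => absurd h hR, fun h => absurd h hD⟩

lemma bsf_fold {n l r : Int} {g : List (List Int)} :
    ∀ (L : List (Int × Int)) (p : PySem.Dict Int Int), (∀ c ∈ L, inb n c) →
      UFInv p → RelInv n l r g p →
      UFInv (L.foldl (BSf n l r g) p) ∧
      RelInv n l r g (L.foldl (BSf n l r g) p) ∧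
      (∀ x y : Int, 0 ≤ x → 0 ≤ y → rootC p x = rootC p y →
        rootC (L.foldl (BSf n l r g) p) x = rootC (L.foldl (BSf n l r g) p) y) ∧
      (∀ c ∈ L, EdgeDone n l r g (L.foldl (BSf n l r g) p) c) := by
  intro L
  induction L with
  | nil =>
    intro p _ hinv hrel
    exact ⟨hinv, hrel, fun x y _ _ h => h, fun c hc => absurd hc (List.not_mem_nil)⟩
  | cons c L ih =>
    intro p hL hinv hrel
    rw [List.foldl_cons]
    have hcin : inb n c := hL c List.mem_cons_self
    obtain ⟨hinv1, hrel1, hmono1, hdone1⟩ := bsf_step hinv hrel hcin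
    obtain ⟨hinv2, hrel2, hmono2, hdone2⟩ :=
      ih (BSf n l r g p c) (fun x hx => hL x (List.mem_cons_of_mem _ hx)) hinv1 hrel1
    refine ⟨hinv2, hrel2, ?_, ?_⟩
    · intro x y hx0 hy0 hxy
      exact hmono2 x y hx0 hy0 (hmono1 x y hx0 hy0 hxy)
    · intro d hd
      rcases List.mem_cons.mp hd with rfl | hd'
      · obtain ⟨hd0, hd1⟩ := idx_bound hcin
        obtain ⟨hda, hdb, hdc, hdd⟩ := id hcin
        refine ⟨fun hcond => ?_, fun hcond => ?_⟩
        · have hnb : inb n (d.1, d.2 + 1) := ⟨hda, hdb, by omega, by simpa using hcond.1⟩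
          obtain ⟨hn0, hn1⟩ := idx_bound hnb
          have e : idxn n d + 1 = idxn n (d.1, d.2 + 1) := by unfold idxn; ring
          have hm := hdone1.1 hcond
          rw [e] at hm ⊢
          exact hmono2 _ _ hd0 hn0 hm
        · have hnb : inb n (d.1 + 1, d.2) := ⟨by omega, by simpa using hcond.1, hdc, hdd⟩
          obtain ⟨hn0, hn1⟩ := idx_bound hnb
          have e : idxn n d + n = idxn n (d.1 + 1, d.2) := by unfold idxn; ring
          have hm := hdone1.2 hcond
          rw [e] at hm ⊢
          exact hmono2 _ _ hd0 hn0 hm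
      · exact hdone2 d hd'

lemma uf_conn (n l r : Int) (g0 : List (List Int)) :
    UFInv (buildP n l r g0) ∧
    RelInv n l r g0 (buildP n l r g0) ∧
    (∀ c ∈ cellsI n, EdgeDone n l r g0 (buildP n l r g0) c) := by
  have hrel0 : RelInv n l r g0 PySem.Dict.empty := by
    intro c d hc hd hroot
    obtain ⟨hc0, hc1⟩ := idx_bound hc
    obtain ⟨hd0, hd1⟩ := idx_bound hd
    rw [rootC_empty _ hc0, rootC_empty _ hd0] at hroot
    exact (idx_inj hc hd hroot) ▸ Relation.ReflTransGen.refl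
  rw [buildP_eq]
  obtain ⟨h1, h2, _, h4⟩ :=
    bsf_fold (cellsI n) PySem.Dict.empty (fun c hc => mem_cellsI.mp hc) UFInv_empty hrel0
  exact ⟨h1, h2, h4⟩

-- every movement edge has been merged by the build pass
lemma edge_root {n l r : Int} {g0 : List (List Int)} {u v : Int × Int}
    (hdone : ∀ c ∈ cellsI n, EdgeDone n l r g0 (buildP n l r g0) c)
    (hEg : Eg n l r g0 u v) :
    rootC (buildP n l r g0) (idxn n u) = rootC (buildP n l r g0) (idxn n v) := by
  obtain ⟨hu, hadj, hv, hl, hr⟩ := hEg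
  rcases hadj with hcase | hcase | hcase | hcase
  · have hd := (hdone u (mem_cellsI.mpr hu)).1
    rw [hcase]
    rw [show idxn n (u.1, u.2 + 1) = idxn n u + 1 from by unfold idxn; ring]
    apply hd
    refine ⟨?_, ?_, ?_⟩
    · have := hv.2.2.2; rw [hcase] at this; simpa using this
    · simpa [gv, hcase] using hl
    · simpa [gv, hcase] using hr
  · have hd := (hdone u (mem_cellsI.mpr hu)).2
    rw [hcase]
    rw [show idxn n (u.1 + 1, u.2) = idxn n u + n from by unfold idxn; ring]
    apply hd
    refine ⟨?_, ?_, ?_⟩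
    · have := hv.2.1; rw [hcase] at this; simpa using this
    · simpa [gv, hcase] using hl
    · simpa [gv, hcase] using hr
  · have hd := (hdone v (mem_cellsI.mpr hv)).1
    have hu2 : u = (v.1, v.2 + 1) := by
      rw [hcase]; exact Prod.ext rfl (by omega)
    rw [hu2]
    rw [show idxn n (v.1, v.2 + 1) = idxn n v + 1 from by unfold idxn; ring]
    symm
    apply hd
    refine ⟨?_, ?_, ?_⟩
    · have := hu.2.2.2; rw [hu2] at this; simpa using this
    · rw [abs_sub_comm] at hl; simpa [gv, hu2] using hl
    · rw [abs_sub_comm] at hr; simpa [gv, hu2] using hr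
  · have hd := (hdone v (mem_cellsI.mpr hv)).2
    have hu2 : u = (v.1 + 1, v.2) := by
      rw [hcase]; exact Prod.ext (by omega) rfl
    rw [hu2]
    rw [show idxn n (v.1 + 1, v.2) = idxn n v + n from by unfold idxn; ring]
    symm
    apply hd
    refine ⟨?_, ?_, ?_⟩
    · have := hu.2.1; rw [hu2] at this; simpa using this
    · rw [abs_sub_comm] at hl; simpa [gv, hu2] using hl
    · rw [abs_sub_comm] at hr; simpa [gv, hu2] using hr

-- ---------- B: the accumulation pass ----------

def pget0 (s : PySem.Dict Int Int) (x : Int) : Int := s.getD x 0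

lemma pget0_insert (s : PySem.Dict Int Int) (kb v x : Int) :
    pget0 (s.insert kb v) x = if x = kb then v else pget0 s x := by
  unfold pget0
  rw [PySem.Dict.getD_insert]

lemma pget0_empty (x : Int) : pget0 (PySem.Dict.empty : PySem.Dict Int Int) x = 0 := by
  unfold pget0
  rw [PySem.Dict.getD_empty]

def ASf (n : Int) (g : List (List Int)) (p : PySem.Dict Int Int)
    (sc : PySem.Dict Int Int × PySem.Dict Int Int) (c : Int × Int) :
    PySem.Dict Int Int × PySem.Dict Int Int :=
  let root := findB p ((c.1 * n + c.2).toNat + 1) (c.1 * n + c.2)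
  (sc.1.insert root (sc.1.getD root 0 + g2 g c.1 c.2),
   sc.2.insert root (sc.2.getD root 0 + 1))

lemma accSC_eq (n : Int) (g : List (List Int)) (p : PySem.Dict Int Int) :
    accSC n g p = (cellsI n).foldl (ASf n g p) (PySem.Dict.empty, PySem.Dict.empty) := by
  unfold accSC
  exact foldl_cellsI n (ASf n g p) _

lemma acc_fold {n : Int} {g : List (List Int)} {p : PySem.Dict Int Int} :
    ∀ (L : List (Int × Int)) (s cnt : PySem.Dict Int Int),
      ∀ k : Int,
        pget0 (L.foldl (ASf n g p) (s, cnt)).1 k =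
          pget0 s k + (((L.filter (fun c => decide (rootC p (idxn n c) = k))).map (gv g)).sum) ∧
        pget0 (L.foldl (ASf n g p) (s, cnt)).2 k =
          pget0 cnt k + ((L.filter (fun c => decide (rootC p (idxn n c) = k))).length : Int) := by
  intro L
  induction L with
  | nil =>
    intro s cnt k
    simp
  | cons c L ih =>
    intro s cnt k
    set root := rootC p (idxn n c) with hroot
    have hstep : ASf n g p (s, cnt) c =
        (s.insert root (pget0 s root + g2 g c.1 c.2),
         cnt.insert root (pget0 cnt root + 1)) := rfl
    rw [List.foldl_cons, hstep]
    obtain ⟨hm1, hm2⟩ := ih (s.insert root (pget0 s root + g2 g c.1 c.2))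
      (cnt.insert root (pget0 cnt root + 1)) k
    rw [hm1, hm2]
    rw [pget0_insert, pget0_insert]
    by_cases hkr : k = root
    · rw [if_pos hkr, if_pos hkr]
      rw [List.filter_cons_of_pos (by simpa using hkr.symm)]
      constructor
      · rw [hkr]; simp only [List.map_cons, List.sum_cons, gv]; ring
      · rw [hkr]; simp only [List.length_cons]; push_cast; ring
    · rw [if_neg hkr, if_neg hkr]
      rw [List.filter_cons_of_neg (by simpa using fun h => hkr h.symm)]
      exact ⟨rfl, rfl⟩

-- the component list, read off the counts/sums dicts
lemma mem_compR {n : Int} {P : PySem.Dict Int Int} {c d : Int × Int} :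
    d ∈ compR n P c ↔ inb n d ∧ rootC P (idxn n d) = rootC P (idxn n c) := by
  unfold compR
  rw [List.mem_filter]
  simp [mem_cellsI]

lemma compR_congr {n : Int} {P : PySem.Dict Int Int} {c c' : Int × Int}
    (h : rootC P (idxn n c) = rootC P (idxn n c')) : compR n P c = compR n P c' := by
  unfold compR
  exact List.filter_congr (fun d _ => by simp [h])

lemma self_mem_compR {n : Int} {P : PySem.Dict Int Int} {c : Int × Int} (hc : inb n c) :
    c ∈ compR n P c := mem_compR.mpr ⟨hc, rfl⟩

lemma acc_char {n l r : Int} {g : List (List Int)} :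
    ∀ c : Int × Int, inb n c →
      pget0 (accSC n g (buildP n l r g)).1 (rootC (buildP n l r g) (idxn n c)) =
        sumR n (buildP n l r g) g c ∧
      pget0 (accSC n g (buildP n l r g)).2 (rootC (buildP n l r g) (idxn n c)) =
        ((compR n (buildP n l r g) c).length : Int) := by
  intro c hc
  rw [accSC_eq]
  obtain ⟨hm1, hm2⟩ := acc_fold (cellsI n) PySem.Dict.empty PySem.Dict.empty
    (rootC (buildP n l r g) (idxn n c))
  have hfilt : (cellsI n).filter
      (fun d => decide (rootC (buildP n l r g) (idxn n d) = rootC (buildP n l r g) (idxn n c))) =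
      compR n (buildP n l r g) c := rfl
  rw [hm1, hm2, hfilt]
  rw [pget0_empty]
  exact ⟨by rw [zero_add]; rfl, by rw [zero_add]⟩

-- ---------- B: the write pass ----------

def WSf (n : Int) (p sums counts : PySem.Dict Int Int) (st : Bool × List (List Int))
    (c : Int × Int) : Bool × List (List Int) :=
  let root := findB p ((c.1 * n + c.2).toNat + 1) (c.1 * n + c.2)
  if 2 ≤ counts.getD root 0 then
    (true, s2 st.2 c.1 c.2 (PySem.Int.floordiv (sums.getD root 0) (counts.getD root 0)))
  else st

lemma dayB_eq (n l r : Int) (g : List (List Int)) :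
    dayB n l r g = (cellsI n).foldl
      (WSf n (buildP n l r g) (accSC n g (buildP n l r g)).1 (accSC n g (buildP n l r g)).2)
      (false, g) := by
  unfold dayB
  exact foldl_cellsI n (WSf n (buildP n l r g) (accSC n g (buildP n l r g)).1
    (accSC n g (buildP n l r g)).2) (false, g)

def WInv (n : Int) (P : PySem.Dict Int Int) (g : List (List Int)) (done : List (Int × Int))
    (st : Bool × List (List Int)) : Prop :=
  ShapeEq g st.2 ∧
  (∀ a b : Nat, ge st.2 a b =
    if ((a : Int), (b : Int)) ∈ done ∧ 2 ≤ (compR n P ((a : Int), (b : Int))).length then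
      PySem.Int.floordiv (sumR n P g ((a : Int), (b : Int)))
        ((compR n P ((a : Int), (b : Int))).length : Int)
    else ge g a b) ∧
  (st.1 = true ↔ ∃ c ∈ done, 2 ≤ (compR n P c).length)

lemma wsf_fold (n l r : Int) (g : List (List Int)) (hsh : PreShape n g) :
    ∀ (L done : List (Int × Int)) (st : Bool × List (List Int)),
      (∀ c ∈ L, inb n c) → (∀ c ∈ L, c ∉ done) → L.Nodup →
      WInv n (buildP n l r g) g done st →
      WInv n (buildP n l r g) g (done ++ L)
        (L.foldl (WSf n (buildP n l r g) (accSC n g (buildP n l r g)).1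
          (accSC n g (buildP n l r g)).2) st) := by
  intro L
  induction L with
  | nil =>
    intro done st _ _ _ hwi
    simpa using hwi
  | cons c L ih =>
    intro done st hL hnd hnodup hwi
    have hcin : inb n c := hL c List.mem_cons_self
    obtain ⟨hca, hcb, hcc, hcd⟩ := id hcin
    obtain ⟨hsum, hcount⟩ := acc_char (l := l) (r := r) c hcin
    have hstep : WSf n (buildP n l r g) (accSC n g (buildP n l r g)).1
        (accSC n g (buildP n l r g)).2 st c =
        if 2 ≤ pget0 (accSC n g (buildP n l r g)).2 (rootC (buildP n l r g) (idxn n c)) then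
          (true, s2 st.2 c.1 c.2 (PySem.Int.floordiv
            (pget0 (accSC n g (buildP n l r g)).1 (rootC (buildP n l r g) (idxn n c)))
            (pget0 (accSC n g (buildP n l r g)).2 (rootC (buildP n l r g) (idxn n c)))))
        else st := rfl
    obtain ⟨hwsh, hwval, hwflag⟩ := hwi
    rw [List.foldl_cons, hstep]
    have hassoc : done ++ c :: L = (done ++ [c]) ++ L := by simp
    rw [hassoc]
    by_cases hbig : 2 ≤ (compR n (buildP n l r g) c).length
    · rw [if_pos (by rw [hcount]; exact_mod_cast hbig)]
      apply ih
      · exact fun x hx => hL x (List.mem_cons_of_mem _ hx)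
      · intro x hx
        simp only [List.mem_append, List.mem_singleton]
        rintro (h | rfl)
        · exact hnd x (List.mem_cons_of_mem _ hx) h
        · exact (List.nodup_cons.mp hnodup).1 hx
      · exact (List.nodup_cons.mp hnodup).2
      · refine ⟨shapeEq_trans hwsh (shapeEq_s2 c.1 c.2 _), ?_, ?_⟩
        · intro a b
          by_cases hab : ((a : Int), (b : Int)) = c
          · rw [hab, if_pos ⟨by simp, hbig⟩]
            have hc1 : c.1 = (a : Int) := (congrArg Prod.fst hab).symm
            have hc2 : c.2 = (b : Int) := (congrArg Prod.snd hab).symm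
            rw [show a = c.1.toNat from by omega, show b = c.2.toNat from by omega]
            show ge (s2 st.2 c.1 c.2 _) c.1.toNat c.2.toNat = _
            rw [ge_s2_self (preShape_of_shapeEq hsh hwsh) hcin, hsum, hcount]
          · have hLHS : ge (s2 st.2 c.1 c.2 (PySem.Int.floordiv
                (pget0 (accSC n g (buildP n l r g)).1 (rootC (buildP n l r g) (idxn n c)))
                (pget0 (accSC n g (buildP n l r g)).2 (rootC (buildP n l r g) (idxn n c))))) a b =
                ge st.2 a b := ge_s2_ne hca hcc hab
            show ge (s2 st.2 c.1 c.2 _) a b = _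
            rw [hLHS, hwval a b]
            by_cases hmem : ((a : Int), (b : Int)) ∈ done
            · by_cases h2 : 2 ≤ (compR n (buildP n l r g) ((a : Int), (b : Int))).length
              · rw [if_pos ⟨hmem, h2⟩, if_pos ⟨by simp [hmem], h2⟩]
              · rw [if_neg (by tauto), if_neg (by rintro ⟨_, hh⟩; exact h2 hh)]
            · rw [if_neg (by tauto), if_neg ?_]
              rintro ⟨hh, _⟩
              rcases List.mem_append.mp hh with hh | hh
              · exact hmem hh
              · exact hab (List.mem_singleton.mp hh)
        · simp only [true_iff]
          exact ⟨c, by simp, hbig⟩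
    · rw [if_neg (by rw [hcount]; exact_mod_cast hbig)]
      apply ih
      · exact fun x hx => hL x (List.mem_cons_of_mem _ hx)
      · intro x hx
        simp only [List.mem_append, List.mem_singleton]
        rintro (h | rfl)
        · exact hnd x (List.mem_cons_of_mem _ hx) h
        · exact (List.nodup_cons.mp hnodup).1 hx
      · exact (List.nodup_cons.mp hnodup).2
      · refine ⟨hwsh, ?_, ?_⟩
        · intro a b
          rw [hwval a b]
          by_cases hab : ((a : Int), (b : Int)) = c
          · rw [if_neg ?_, if_neg ?_]
            · rintro ⟨_, hh⟩; rw [hab] at hh; exact hbig hh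
            · rintro ⟨_, hh⟩; rw [hab] at hh; exact hbig hh
          · by_cases hmem : ((a : Int), (b : Int)) ∈ done
            · by_cases h2 : 2 ≤ (compR n (buildP n l r g) ((a : Int), (b : Int))).length
              · rw [if_pos ⟨hmem, h2⟩, if_pos ⟨by simp [hmem], h2⟩]
              · rw [if_neg (by tauto), if_neg (by rintro ⟨_, hh⟩; exact h2 hh)]
            · rw [if_neg (by tauto), if_neg ?_]
              rintro ⟨hh, _⟩
              rcases List.mem_append.mp hh with hh | hh
              · exact hmem hh
              · exact hab (List.mem_singleton.mp hh)
        · rw [hwflag]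
          constructor
          · rintro ⟨x, hx, h2⟩
            exact ⟨x, by simp [hx], h2⟩
          · rintro ⟨x, hx, h2⟩
            simp only [List.mem_append, List.mem_singleton] at hx
            rcases hx with hx | rfl
            · exact ⟨x, hx, h2⟩
            · exact absurd h2 hbig

lemma uf_main (n l r : Int) (g0 : List (List Int)) :
    UFInv (buildP n l r g0) ∧
    ∀ c d, inb n c → inb n d →
      (rootC (buildP n l r g0) (idxn n c) = rootC (buildP n l r g0) (idxn n d) ↔
        Conn n l r g0 c d) := by
  obtain ⟨hinv, hrel, hdone⟩ := uf_conn n l r g0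
  refine ⟨hinv, fun c d hc hd => ⟨fun h => hrel c d hc hd h, fun h => ?_⟩⟩
  induction h with
  | refl => rfl
  | tail _ hstep ih => exact (ih hstep.1).trans (edge_root hdone hstep)


-- ---------- A: one day, characterized against the union-find components ----------

-- writing one value at a list of distinct in-bounds cells, pointwise
lemma ge_writes (n : Int) (v : Int) :
    ∀ (L : List (Int × Int)) (g : List (List Int)), (∀ c ∈ L, inb n c) → PreShape n g →
      ShapeEq g (L.foldl (fun m c => s2 m c.1 c.2 v) g) ∧
      ∀ a b : Nat, ge (L.foldl (fun m c => s2 m c.1 c.2 v) g) a b =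
        if ((a : Int), (b : Int)) ∈ L then v else ge g a b := by
  intro L
  induction L with
  | nil =>
    intro g _ _
    exact ⟨shapeEq_refl g, fun a b => by simp⟩
  | cons c L ih =>
    intro g hL hsh
    have hcin : inb n c := hL c List.mem_cons_self
    obtain ⟨hca, hcb, hcc, hcd⟩ := id hcin
    rw [List.foldl_cons]
    obtain ⟨ih1, ih2⟩ := ih (s2 g c.1 c.2 v) (fun x hx => hL x (List.mem_cons_of_mem _ hx))
      (preShape_of_shapeEq hsh (shapeEq_s2 c.1 c.2 v))
    refine ⟨shapeEq_trans (shapeEq_s2 c.1 c.2 v) ih1, ?_⟩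
    intro a b
    rw [ih2 a b]
    by_cases hab : ((a : Int), (b : Int)) = c
    · by_cases hmem : ((a : Int), (b : Int)) ∈ L
      · rw [if_pos hmem, if_pos (by simp [hmem])]
      · rw [if_neg hmem, if_pos (by simp [hab])]
        have hc1 : c.1 = (a : Int) := (congrArg Prod.fst hab).symm
        have hc2 : c.2 = (b : Int) := (congrArg Prod.snd hab).symm
        rw [show a = c.1.toNat from by omega, show b = c.2.toNat from by omega]
        exact ge_s2_self hsh hcin
    · by_cases hmem : ((a : Int), (b : Int)) ∈ L
      · rw [if_pos hmem, if_pos (by simp [hmem])]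
      · rw [if_neg hmem, if_neg (by simp [hab, hmem]), ge_s2_ne hca hcc hab]

-- BFS reachability from a fresh seed = connectivity in the start grid
lemma reach_iff_conn (n l r : Int) (g0 gcur visited : List (List Int)) (c : Int × Int)
    (hc : inb n c) (hcm : ¬ g2 visited c.1 c.2 = 1)
    (hclosed : ∀ a b, inb n a → g2 visited a.1 a.2 = 1 → Eg n l r g0 a b →
      g2 visited b.1 b.2 = 1)
    (hoff : ∀ d, inb n d → ¬ g2 visited d.1 d.2 = 1 → gv gcur d = gv g0 d)
    (V0 : Int × Int → Prop)
    (hV0 : ∀ d, inb n d → (V0 d ↔ (g2 visited d.1 d.2 = 1 ∨ d = c))) :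
    ∀ d, Reach n l r gcur V0 c d ↔ (inb n d ∧ Conn n l r g0 c d) := by
  have hEg_conv : ∀ a b, ¬ g2 visited a.1 a.2 = 1 → ¬ g2 visited b.1 b.2 = 1 →
      (Eg n l r gcur a b ↔ Eg n l r g0 a b) := by
    intro a b hna hnb
    unfold Eg
    constructor
    · rintro ⟨h1, h2, h3, h4, h5⟩
      rw [hoff a h1 hna, hoff b h3 hnb] at h4 h5
      exact ⟨h1, h2, h3, h4, h5⟩
    · rintro ⟨h1, h2, h3, h4, h5⟩
      rw [← hoff a h1 hna, ← hoff b h3 hnb] at h4 h5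
      exact ⟨h1, h2, h3, h4, h5⟩
  have R1 : ∀ d, Reach n l r gcur V0 c d → Conn n l r g0 c d ∧ ¬ g2 visited d.1 d.2 = 1 := by
    intro d h
    induction h with
    | refl => exact ⟨Relation.ReflTransGen.refl, hcm⟩
    | tail hch hstep ih =>
      obtain ⟨hConn, hnm⟩ := ih
      have hbinb : inb n _ := hstep.1.2.2.1
      have hnb : ¬ g2 visited _ _ = 1 := fun hm =>
        hstep.2 ((hV0 _ hbinb).mpr (Or.inl hm))
      have hEg0 := (hEg_conv _ _ hnm hnb).mp hstep.1
      exact ⟨Relation.ReflTransGen.tail hConn hEg0, hnb⟩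
  have R2 : ∀ d, Conn n l r g0 c d → ¬ g2 visited d.1 d.2 = 1 ∧
      Relation.ReflTransGen (fun a b => Eg n l r gcur a b ∧ ¬ g2 visited b.1 b.2 = 1) c d := by
    intro d h
    induction h with
    | refl => exact ⟨hcm, Relation.ReflTransGen.refl⟩
    | tail hch hstep ih =>
      obtain ⟨hnm, hR⟩ := ih
      have hbinb : inb n _ := hstep.2.2.1
      have hainb : inb n _ := hstep.1
      have hnb : ¬ g2 visited _ _ = 1 := fun hm =>
        hnm (hclosed _ _ hbinb hm (Eg_symm hstep))
      have hEgc := (hEg_conv _ _ hnm hnb).mpr hstep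
      exact ⟨hnb, Relation.ReflTransGen.tail hR ⟨hEgc, hnb⟩⟩
  have R3 : ∀ d, Relation.ReflTransGen
      (fun a b => Eg n l r gcur a b ∧ ¬ g2 visited b.1 b.2 = 1) c d →
      Reach n l r gcur V0 c d := by
    intro d h
    induction h with
    | refl => exact Relation.ReflTransGen.refl
    | @tail b e hch hstep ih =>
      by_cases hbc : e = c
      · rw [hbc]
        exact Relation.ReflTransGen.refl
      · refine Relation.ReflTransGen.tail ih ⟨hstep.1, ?_⟩
        intro hV
        rcases (hV0 _ hstep.1.2.2.1).mp hV with hm | he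
        · exact hstep.2 hm
        · exact hbc he
  intro d
  constructor
  · intro h
    exact ⟨Reach_inb hc h, (R1 d h).1⟩
  · rintro ⟨hdinb, hconn⟩
    exact R3 d (R2 d hconn).2

-- the per-day A-side invariant
def ADInv (n l r : Int) (g0 : List (List Int)) (st : List (List Int) × Int × List (List Int)) :
    Prop :=
  shapeV n.toNat st.1 ∧ binV n st.1 ∧
  (∀ a b, inb n a → g2 st.1 a.1 a.2 = 1 → Eg n l r g0 a b → g2 st.1 b.1 b.2 = 1) ∧
  ShapeEq g0 st.2.2 ∧
  (∀ a b : Nat, ge st.2.2 a b =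
    if inb n ((a : Int), (b : Int)) ∧ g2 st.1 (a : Int) (b : Int) = 1 ∧
        2 ≤ (compR n (buildP n l r g0) ((a : Int), (b : Int))).length then
      PySem.Int.floordiv (sumR n (buildP n l r g0) g0 ((a : Int), (b : Int)))
        ((compR n (buildP n l r g0) ((a : Int), (b : Int))).length : Int)
    else ge g0 a b) ∧
  (st.2.1 = 0 ∨ st.2.1 = 1) ∧
  (st.2.1 = 1 ↔ ∃ c, inb n c ∧ g2 st.1 c.1 c.2 = 1 ∧
    2 ≤ (compR n (buildP n l r g0) c).length)

def AStep (n l r : Int) (st : List (List Int) × Int × List (List Int)) (c : Int × Int) :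
    List (List Int) × Int × List (List Int) :=
  if g2 st.1 c.1 c.2 = 0 then
    let visited := s2 st.1 c.1 c.2 1
    let t := bfsA n l r c.1 c.2 visited st.2.2
    (t.2.1, if t.1 ≠ 0 then 1 else st.2.1, t.2.2)
  else st

lemma dayA_eq (n l r : Int) (g : List (List Int)) :
    dayA n l r g = (((cellsI n).foldl (AStep n l r) (mkVis n, 0, g)).2.1,
      ((cellsI n).foldl (AStep n l r) (mkVis n, 0, g)).2.2) := by
  unfold dayA
  rw [show (PySem.List.pyRange 0 n 1).foldl (fun st i =>
    (PySem.List.pyRange 0 n 1).foldl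
      (fun (st : List (List Int) × Int × List (List Int)) j =>
        if g2 st.1 i j = 0 then
          let visited := s2 st.1 i j 1
          let t := bfsA n l r i j visited st.2.2
          (t.2.1, if t.1 ≠ 0 then 1 else st.2.1, t.2.2)
        else st) st) (mkVis n, 0, g) =
      (cellsI n).foldl (AStep n l r) (mkVis n, 0, g) from
    foldl_cellsI n (AStep n l r) (mkVis n, 0, g)]

set_option maxHeartbeats 2000000 in
lemma aday_step (n l r : Int) (g0 : List (List Int)) (hsh0 : PreShape n g0)
    {st : List (List Int) × Int × List (List Int)} {c : Int × Int}
    (hc : inb n c) (hinv : ADInv n l r g0 st) :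
    ADInv n l r g0 (AStep n l r st c) ∧
    (∀ d, inb n d → g2 st.1 d.1 d.2 = 1 → g2 (AStep n l r st c).1 d.1 d.2 = 1) ∧
    g2 (AStep n l r st c).1 c.1 c.2 = 1 := by
  obtain ⟨hsh, hbin, hclosed, hgsh, hval, h01, hflag⟩ := hinv
  obtain ⟨hca, hcb, hcc, hcd⟩ := id hc
  by_cases hskip : g2 st.1 c.1 c.2 = 0
  case neg =>
    have hstep : AStep n l r st c = st := by unfold AStep; rw [if_neg hskip]
    rw [hstep]
    have hm : g2 st.1 c.1 c.2 = 1 := (hbin c hc).resolve_left hskip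
    exact ⟨⟨hsh, hbin, hclosed, hgsh, hval, h01, hflag⟩, fun d _ h => h, hm⟩
  case pos =>
    -- seed a BFS at c
    have hstep : AStep n l r st c =
        ((bfsA n l r c.1 c.2 (s2 st.1 c.1 c.2 1) st.2.2).2.1,
          if (bfsA n l r c.1 c.2 (s2 st.1 c.1 c.2 1) st.2.2).1 ≠ 0 then 1 else st.2.1,
          (bfsA n l r c.1 c.2 (s2 st.1 c.1 c.2 1) st.2.2).2.2) := by
      unfold AStep; rw [if_pos hskip]
    set vis1 := s2 st.1 c.1 c.2 1 with hvis1
    have hsh1 : shapeV n.toNat vis1 := shapeV_s2 hsh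
    have hmarkc : g2 vis1 c.1 c.2 = 1 := g2_s2_self hsh hc
    have hother : ∀ d : Int × Int, inb n d → d ≠ c → g2 vis1 d.1 d.2 = g2 st.1 d.1 d.2 := by
      intro d hd hne
      exact g2_s2_ne hca hcc hd.1 hd.2.2.1 hne
    have hbin1 : binV n vis1 := by
      intro d hd
      by_cases hdc : d = c
      · subst hdc; right; exact hmarkc
      · rw [hother d hd hdc]; exact hbin d hd
    set V0 : Int × Int → Prop := fun d => g2 vis1 d.1 d.2 = 1 with hV0def
    have hV0iff : ∀ d, inb n d → (V0 d ↔ (g2 st.1 d.1 d.2 = 1 ∨ d = c)) := by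
      intro d hd
      by_cases hdc : d = c
      · subst hdc
        exact ⟨fun _ => Or.inr rfl, fun _ => hmarkc⟩
      · have he : V0 d ↔ g2 st.1 d.1 d.2 = 1 := by
          show g2 vis1 d.1 d.2 = 1 ↔ _
          rw [hother d hd hdc]
        rw [he]
        exact ⟨Or.inl, fun h => h.resolve_right hdc⟩
    have hoff : ∀ d, inb n d → ¬ g2 st.1 d.1 d.2 = 1 → gv st.2.2 d = gv g0 d := by
      intro d hd hnm
      obtain ⟨hd1, hd2, hd3, hd4⟩ := id hd
      unfold gv
      rw [g2_eq_ge hd1 hd3, g2_eq_ge hd1 hd3, hval d.1.toNat d.2.toNat]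
      rw [if_neg ?_]
      rintro ⟨_, hm, _⟩
      rw [show ((d.1.toNat : Int)) = d.1 from by omega,
        show ((d.2.toNat : Int)) = d.2 from by omega] at hm
      exact hnm hm
    -- run the BFS invariant
    have hA := bfs_run n l r st.2.2 V0 c hc (n.toNat * n.toNat + 1) [c] [] 0 vis1
      ⟨hsh1, hbin1,
        (by
          intro d hd
          constructor
          · intro h; exact Or.inl h
          · rintro (h | h | h)
            · exact h
            · cases h
            · rw [List.mem_singleton.mp h]; exact hmarkc),
        by simp,
        (by
          intro d hd
          rw [List.nil_append, List.mem_singleton] at hd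
          rw [hd]
          exact Relation.ReflTransGen.refl),
        (by intro a ha; cases ha), Or.inr (by simp), by simp⟩
      (by
        have := unvisA_le n vis1
        simp only [List.length_cons, List.length_nil]
        omega)
    set t := bfsLoop n l r st.2.2 (n.toNat * n.toNat + 1) [c] [] 0 vis1 with ht
    -- check = the union-find component of c
    have hreach := reach_iff_conn n l r g0 st.2.2 st.1 c hc (by rw [hskip]; omega)
      hclosed hoff V0 hV0iff
    have hmem : ∀ d, d ∈ t.1 ↔ d ∈ compR n (buildP n l r g0) c := by
      intro d
      rw [AInv_final_mem hA d, hreach d, mem_compR]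
      constructor
      · rintro ⟨h1, h2⟩
        exact ⟨h1, ((uf_main n l r g0).2 d c h1 hc).mpr (Conn_symm h2)⟩
      · rintro ⟨h1, h2⟩
        exact ⟨h1, Conn_symm (((uf_main n l r g0).2 d c h1 hc).mp h2)⟩
    have hndA : t.1.Nodup := by have := hA.hnd; simpa using this
    have hndC : (compR n (buildP n l r g0) c).Nodup :=
      List.Nodup.filter _ nodup_cellsI
    have hperm : t.1.Perm (compR n (buildP n l r g0) c) := by
      apply List.perm_of_nodup_nodup_toFinset_eq hndA hndC
      ext x
      simp only [List.mem_toFinset]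
      exact hmem x
    have hlen : t.1.length = (compR n (buildP n l r g0) c).length := hperm.length_eq
    have hcmem : c ∈ t.1 := (AInv_final_mem hA c).mpr Relation.ReflTransGen.refl
    have hunm : ∀ d ∈ t.1, inb n d ∧ ¬ g2 st.1 d.1 d.2 = 1 := by
      intro d hd
      have hr := (AInv_final_mem hA d).mp hd
      have hinb := Reach_inb hc hr
      refine ⟨hinb, ?_⟩
      intro hm
      have hR1 : ∀ e, Reach n l r st.2.2 V0 c e → Conn n l r g0 c e ∧
          ¬ g2 st.1 e.1 e.2 = 1 := by
        intro e he
        induction he with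
        | refl => exact ⟨Relation.ReflTransGen.refl, by rw [hskip]; omega⟩
        | @tail x y hch hstp ih =>
          obtain ⟨hConn, hnm⟩ := ih
          have hbinb : inb n y := hstp.1.2.2.1
          have hnb : ¬ g2 st.1 y.1 y.2 = 1 := fun hmm =>
            hstp.2 ((hV0iff _ hbinb).mpr (Or.inl hmm))
          have hEg0 : Eg n l r g0 x y := by
            obtain ⟨e1, e2, e3, e4, e5⟩ := hstp.1
            rw [hoff _ e1 hnm, hoff _ e3 hnb] at e4 e5
            exact ⟨e1, e2, e3, e4, e5⟩
          exact ⟨Relation.ReflTransGen.tail hConn hEg0, hnb⟩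
      exact (hR1 d hr).2 hm
    have hsum : t.2.1 = sumR n (buildP n l r g0) g0 c := by
      rw [hA.hres]
      unfold sumR
      rw [List.map_congr_left (fun d hd => hoff d (hunm d hd).1 (hunm d hd).2)]
      exact hperm.map (gv g0) |>.sum_eq
    -- the new visited matrix marks = old marks plus the component of c
    have hmk' : ∀ d, inb n d →
        (g2 t.2.2 d.1 d.2 = 1 ↔ g2 st.1 d.1 d.2 = 1 ∨ d ∈ compR n (buildP n l r g0) c) := by
      intro d hd
      rw [hA.hmk d hd]
      rw [hV0iff d hd]
      rw [hmem d]
      constructor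
      · rintro ((h | h) | h | h)
        · exact Or.inl h
        · exact Or.inr (by rw [h]; exact self_mem_compR hc)
        · exact Or.inr h
        · cases h
      · rintro (h | h)
        · exact Or.inl (Or.inl h)
        · exact Or.inr (Or.inl h)
    have hclosed' : ∀ a b, inb n a → g2 t.2.2 a.1 a.2 = 1 → Eg n l r g0 a b →
        g2 t.2.2 b.1 b.2 = 1 := by
      intro a b hainb hma hEg
      have hbinb : inb n b := hEg.2.2.1
      rw [hmk' b hbinb]
      rcases (hmk' a hainb).mp hma with hma' | hma'
      · exact Or.inl (hclosed a b hainb hma' hEg)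
      · right
        obtain ⟨_, hroot⟩ := mem_compR.mp hma'
        refine mem_compR.mpr ⟨hbinb, ?_⟩
        rw [← hroot]
        exact (edge_root (uf_conn n l r g0).2.2 (Eg_symm hEg))
    have hcomp_congr : ∀ d ∈ compR n (buildP n l r g0) c,
        compR n (buildP n l r g0) d = compR n (buildP n l r g0) c := by
      intro d hd
      exact compR_congr (mem_compR.mp hd).2
    -- case split on the component size
    have hlen1 : 1 ≤ t.1.length := List.length_pos_of_mem hcmem
    have hbfsA : bfsA n l r c.1 c.2 vis1 st.2.2 =
        if t.1.length = 1 then (0, t.2.2, st.2.2)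
        else (1, t.2.2,
          t.1.foldl (fun m d => s2 m d.1 d.2
            (PySem.Int.floordiv t.2.1 (t.1.length : Int))) st.2.2) := rfl
    by_cases hone : t.1.length = 1
    · -- singleton component: nothing moves
      have hnot2 : ¬ 2 ≤ (compR n (buildP n l r g0) c).length := by omega
      rw [hstep, hbfsA, if_pos hone]
      refine ⟨⟨hA.hsh, hA.hbin, hclosed', hgsh, ?_, by simpa using h01, ?_⟩, ?_, ?_⟩
      · intro a b
        rw [hval a b]
        by_cases hq : inb n ((a : Int), (b : Int))
        · by_cases hm : g2 st.1 (a : Int) (b : Int) = 1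
          · have hm' : g2 t.2.2 (a : Int) (b : Int) = 1 := (hmk' _ hq).mpr (Or.inl hm)
            by_cases h2 : 2 ≤ (compR n (buildP n l r g0) ((a : Int), (b : Int))).length
            · rw [if_pos ⟨hq, hm, h2⟩, if_pos ⟨hq, hm', h2⟩]
            · rw [if_neg (by tauto), if_neg (by rintro ⟨_, _, hh⟩; exact h2 hh)]
          · by_cases hm2 : g2 t.2.2 (a : Int) (b : Int) = 1
            · have hcm : ((a : Int), (b : Int)) ∈ compR n (buildP n l r g0) c :=
                ((hmk' _ hq).mp hm2).resolve_left hm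
              have hs1 : ¬ 2 ≤ (compR n (buildP n l r g0) ((a : Int), (b : Int))).length := by
                rw [hcomp_congr _ hcm]; omega
              rw [if_neg (by tauto), if_neg (by rintro ⟨_, _, hh⟩; exact hs1 hh)]
            · rw [if_neg (by tauto), if_neg (by tauto)]
        · rw [if_neg (by tauto), if_neg (by tauto)]
      · show (if (0 : Int) ≠ 0 then 1 else st.2.1) = 1 ↔ _
        rw [if_neg (by omega)]
        rw [hflag]
        constructor
        · rintro ⟨d, h1, h2, h3⟩
          exact ⟨d, h1, (hmk' d h1).mpr (Or.inl h2), h3⟩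
        · rintro ⟨d, h1, h2, h3⟩
          rcases (hmk' d h1).mp h2 with h | h
          · exact ⟨d, h1, h, h3⟩
          · exfalso
            rw [hcomp_congr d h] at h3
            omega
      · intro d hd hm
        exact (hmk' d hd).mpr (Or.inl hm)
      · exact (hmk' c hc).mpr (Or.inr (self_mem_compR hc))
    · -- a genuine component: write the average everywhere in it
      have h2c : 2 ≤ (compR n (buildP n l r g0) c).length := by omega
      rw [hstep, hbfsA, if_neg hone]
      obtain ⟨hwsh, hwval⟩ := ge_writes n (PySem.Int.floordiv t.2.1 (t.1.length : Int)) t.1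
        st.2.2 (fun d hd => (hunm d hd).1) (preShape_of_shapeEq hsh0 hgsh)
      refine ⟨⟨hA.hsh, hA.hbin, hclosed', shapeEq_trans hgsh hwsh, ?_, Or.inr rfl, ?_⟩, ?_, ?_⟩
      · intro a b
        rw [hwval a b]
        by_cases hq : ((a : Int), (b : Int)) ∈ t.1
        · have hqc : ((a : Int), (b : Int)) ∈ compR n (buildP n l r g0) c := (hmem _).mp hq
          have hqinb : inb n ((a : Int), (b : Int)) := (hunm _ hq).1
          have hqm : g2 t.2.2 (a : Int) (b : Int) = 1 := (hmk' _ hqinb).mpr (Or.inr hqc)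
          rw [if_pos hq, if_pos ⟨hqinb, hqm, by rw [hcomp_congr _ hqc]; exact h2c⟩]
          rw [hsum, hlen, hcomp_congr _ hqc]
          rw [show sumR n (buildP n l r g0) g0 ((a : Int), (b : Int)) =
            sumR n (buildP n l r g0) g0 c from by unfold sumR; rw [hcomp_congr _ hqc]]
        · rw [if_neg hq, hval a b]
          by_cases hqinb : inb n ((a : Int), (b : Int))
          · have hnotc : ((a : Int), (b : Int)) ∉ compR n (buildP n l r g0) c :=
              fun h => hq ((hmem _).mpr h)
            by_cases hm : g2 st.1 (a : Int) (b : Int) = 1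
            · have hm' : g2 t.2.2 (a : Int) (b : Int) = 1 := (hmk' _ hqinb).mpr (Or.inl hm)
              by_cases hc2 : 2 ≤ (compR n (buildP n l r g0) ((a : Int), (b : Int))).length
              · rw [if_pos ⟨hqinb, hm, hc2⟩, if_pos ⟨hqinb, hm', hc2⟩]
              · rw [if_neg (by tauto), if_neg (by rintro ⟨_, _, hh⟩; exact hc2 hh)]
            · have hm2 : ¬ g2 t.2.2 (a : Int) (b : Int) = 1 := by
                intro hmm
                rcases (hmk' _ hqinb).mp hmm with h | h
                · exact hm h
                · exact hnotc h
              rw [if_neg (by tauto), if_neg (by tauto)]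
          · rw [if_neg (by tauto), if_neg (by tauto)]
      · show (if (1 : Int) ≠ 0 then 1 else st.2.1) = 1 ↔ _
        rw [if_pos (by omega)]
        simp only [true_iff]
        exact ⟨c, hc, (hmk' c hc).mpr (Or.inr (self_mem_compR hc)), h2c⟩
      · intro d hd hm
        exact (hmk' d hd).mpr (Or.inl hm)
      · exact (hmk' c hc).mpr (Or.inr (self_mem_compR hc))

lemma aday_fold (n l r : Int) (g0 : List (List Int)) (hsh0 : PreShape n g0) :
    ∀ (L : List (Int × Int)) (st : List (List Int) × Int × List (List Int)),
      (∀ c ∈ L, inb n c) → ADInv n l r g0 st →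
      ADInv n l r g0 (L.foldl (AStep n l r) st) ∧
      (∀ d, inb n d → g2 st.1 d.1 d.2 = 1 → g2 (L.foldl (AStep n l r) st).1 d.1 d.2 = 1) ∧
      (∀ c ∈ L, g2 (L.foldl (AStep n l r) st).1 c.1 c.2 = 1) := by
  intro L
  induction L with
  | nil =>
    intro st _ hinv
    exact ⟨hinv, fun d _ h => h, fun c hc => absurd hc (List.not_mem_nil)⟩
  | cons c L ih =>
    intro st hL hinv
    have hcin : inb n c := hL c List.mem_cons_self
    obtain ⟨hinv1, hmono1, hmarked1⟩ := aday_step n l r g0 hsh0 hcin hinv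
    rw [List.foldl_cons]
    obtain ⟨hinv2, hmono2, hmarked2⟩ :=
      ih (AStep n l r st c) (fun x hx => hL x (List.mem_cons_of_mem _ hx)) hinv1
    refine ⟨hinv2, ?_, ?_⟩
    · intro d hd h
      exact hmono2 d hd (hmono1 d hd h)
    · intro x hx
      rcases List.mem_cons.mp hx with rfl | hx'
      · exact hmono2 x hcin hmarked1
      · exact hmarked2 x hx'

lemma dayA_char (n l r : Int) (g0 : List (List Int)) (hsh : PreShape n g0) :
    ((dayA n l r g0).1 = 0 ∨ (dayA n l r g0).1 = 1) ∧
    ((dayA n l r g0).1 = 1 ↔ DayMoved n (buildP n l r g0)) ∧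
    DayGrid n (buildP n l r g0) g0 (dayA n l r g0).2 := by
  rw [dayA_eq]
  have hinit : ADInv n l r g0 (mkVis n, 0, g0) := by
    refine ⟨shapeV_mkVis n, fun c _ => Or.inl (g2_mkVis n c.1 c.2),
      ?_, shapeEq_refl g0, ?_, Or.inl rfl, ?_⟩
    · intro a b _ hm _
      rw [g2_mkVis] at hm
      cases hm
    · intro a b
      rw [if_neg (by rintro ⟨_, hm, _⟩; rw [g2_mkVis] at hm; cases hm)]
    · constructor
      · intro h; cases h
      · rintro ⟨c, _, hm, _⟩
        rw [g2_mkVis] at hm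
        cases hm
  obtain ⟨⟨_, _, _, hgsh, hval, h01, hflag⟩, _, hall⟩ :=
    aday_fold n l r g0 hsh (cellsI n) (mkVis n, 0, g0) (fun c hc => mem_cellsI.mp hc) hinit
  refine ⟨h01, ?_, hgsh, ?_⟩
  · rw [hflag]
    unfold DayMoved
    constructor
    · rintro ⟨c, h1, _, h3⟩
      exact ⟨c, h1, h3⟩
    · rintro ⟨c, h1, h3⟩
      exact ⟨c, h1, hall c (mem_cellsI.mpr h1), h3⟩
  · intro a b
    rw [hval a b]
    by_cases hq : inb n ((a : Int), (b : Int))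
    · have hm := hall _ (mem_cellsI.mpr hq)
      by_cases h2 : 2 ≤ (compR n (buildP n l r g0) ((a : Int), (b : Int))).length
      · rw [if_pos ⟨hq, hm, h2⟩, if_pos ⟨hq, h2⟩]
      · rw [if_neg (by rintro ⟨_, _, hh⟩; exact h2 hh), if_neg (by rintro ⟨_, hh⟩; exact h2 hh)]
    · rw [if_neg (by tauto), if_neg (by tauto)]

lemma dayB_char (n l r : Int) (g0 : List (List Int)) (hsh : PreShape n g0) :
    ((dayB n l r g0).1 = true ↔ DayMoved n (buildP n l r g0)) ∧
    DayGrid n (buildP n l r g0) g0 (dayB n l r g0).2 := by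
  rw [dayB_eq]
  have h := wsf_fold n l r g0 hsh (cellsI n) [] (false, g0)
    (fun c hc => mem_cellsI.mp hc) (fun c _ h => absurd h (List.not_mem_nil))
    nodup_cellsI
    ⟨shapeEq_refl g0, fun a b => by rw [if_neg (by rintro ⟨h, _⟩; exact List.not_mem_nil h)],
      by simp⟩
  obtain ⟨hwsh, hwval, hwflag⟩ := h
  refine ⟨?_, hwsh, ?_⟩
  · rw [hwflag]
    unfold DayMoved
    constructor
    · rintro ⟨c, hc, h2⟩
      exact ⟨c, mem_cellsI.mp (by simpa using hc), h2⟩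
    · rintro ⟨c, hc, h2⟩
      exact ⟨c, by simpa using mem_cellsI.mpr hc, h2⟩
  · intro a b
    rw [hwval a b]
    by_cases hinb : inb n ((a : Int), (b : Int))
    · by_cases h2 : 2 ≤ (compR n (buildP n l r g0) ((a : Int), (b : Int))).length
      · rw [if_pos ⟨by simpa using mem_cellsI.mpr hinb, h2⟩, if_pos ⟨hinb, h2⟩]
      · rw [if_neg (by rintro ⟨_, hh⟩; exact h2 hh), if_neg (by rintro ⟨_, hh⟩; exact h2 hh)]
    · rw [if_neg (by rintro ⟨hh, _⟩; exact hinb (mem_cellsI.mp (by simpa using hh))),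
        if_neg (by rintro ⟨hh, _⟩; exact hinb hh)]

lemma grid_ext (g0 g1 g2' : List (List Int)) (h1 : ShapeEq g0 g1) (h2 : ShapeEq g0 g2')
    (h : ∀ a b : Nat, ge g1 a b = ge g2' a b) : g1 = g2' := by
  have hlen : g1.length = g2'.length := h1.1.trans h2.1.symm
  apply List.ext_getElem?
  intro a
  by_cases ha : a < g1.length
  · have ha2 : a < g2'.length := by omega
    rw [List.getElem?_eq_getElem ha, List.getElem?_eq_getElem ha2]
    have hrl : g1[a].length = g2'[a].length := by
      have e1 : (g1[a]?.getD []).length = (g0[a]?.getD []).length := h1.2 a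
      have e2 : (g2'[a]?.getD []).length = (g0[a]?.getD []).length := h2.2 a
      rw [List.getElem?_eq_getElem ha] at e1
      rw [List.getElem?_eq_getElem ha2] at e2
      simpa using e1.trans e2.symm
    congr 1
    apply List.ext_getElem?
    intro b
    by_cases hb : b < g1[a].length
    · have hb2 : b < g2'[a].length := by omega
      rw [List.getElem?_eq_getElem hb, List.getElem?_eq_getElem hb2]
      have := h a b
      unfold ge at this
      rw [List.getElem?_eq_getElem ha, List.getElem?_eq_getElem ha2] at this
      simp only [Option.getD_some] at this
      rw [List.getElem?_eq_getElem hb, List.getElem?_eq_getElem hb2] at this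
      simpa using this
    · rw [List.getElem?_eq_none (by omega), List.getElem?_eq_none (by omega)]
  · rw [List.getElem?_eq_none (by omega), List.getElem?_eq_none (by omega)]

lemma day_eq (n l r : Int) (g : List (List Int)) (hsh : PreShape n g) :
    ((dayA n l r g).1 = 0 ∨ (dayA n l r g).1 = 1) ∧
    ((dayA n l r g).1 = 1 ↔ (dayB n l r g).1 = true) ∧
    (dayA n l r g).2 = (dayB n l r g).2 ∧ PreShape n (dayA n l r g).2 := by
  obtain ⟨h01, hAflag, hAsh, hAval⟩ :=
    (fun h => ⟨h.1, h.2.1, h.2.2.1, h.2.2.2⟩ :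
      _ → ((dayA n l r g).1 = 0 ∨ (dayA n l r g).1 = 1) ∧
        ((dayA n l r g).1 = 1 ↔ DayMoved n (buildP n l r g)) ∧
        ShapeEq g (dayA n l r g).2 ∧ _) (dayA_char n l r g hsh)
  obtain ⟨hBflag, hBsh, hBval⟩ :=
    (fun h => ⟨h.1, h.2.1, h.2.2⟩ :
      _ → ((dayB n l r g).1 = true ↔ DayMoved n (buildP n l r g)) ∧
        ShapeEq g (dayB n l r g).2 ∧ _) (dayB_char n l r g hsh)
  refine ⟨h01, hAflag.trans hBflag.symm, ?_, preShape_of_shapeEq hsh hAsh⟩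
  exact grid_ext g _ _ hAsh hBsh (fun a b => (hAval a b).trans (hBval a b).symm)

lemma loop_eq (n l r : Int) :
    ∀ (fuel : Nat) (ans : Int) (g : List (List Int)), PreShape n g →
      loopA n l r fuel ans g = loopB n l r fuel ans g := by
  intro fuel
  induction fuel with
  | zero => intro ans g _; rfl
  | succ fuel ih =>
    intro ans g hsh
    obtain ⟨h01, hflag, hgeq, hsh'⟩ := day_eq n l r g hsh
    have hA : loopA n l r (fuel + 1) ans g =
        if (dayA n l r g).1 ≠ 0 then loopA n l r fuel (ans + 1) (dayA n l r g).2 else ans := rfl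
    have hB : loopB n l r (fuel + 1) ans g =
        if (dayB n l r g).1 then loopB n l r fuel (ans + 1) (dayB n l r g).2 else ans := rfl
    rw [hA, hB]
    by_cases hz : (dayA n l r g).1 = 0
    · have hbf : (dayB n l r g).1 = false := by
        rcases Bool.eq_false_or_eq_true (dayB n l r g).1 with hb | hb
        · rw [← hflag] at hb; rw [hb] at hz; cases hz
        · exact hb
      rw [if_neg (by simpa using hz), hbf, if_neg (by simp)]
    · have h1 : (dayA n l r g).1 = 1 := h01.resolve_left hz
      have hbt : (dayB n l r g).1 = true := hflag.mp h1
      rw [if_pos hz, hbt, if_pos rfl, ← hgeq]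
      exact ih (ans + 1) (dayA n l r g).2 hsh'

theorem solution_spec : Claim_equal_solution := by
  intro n l r gmap hdom hpre
  unfold Spec_solution solution solution_alt
  apply loop_eq
  obtain ⟨⟨hlen, hrows⟩, _⟩ := hpre
  refine ⟨hlen, ?_⟩
  intro a ha
  have hmem : (gmap[a]?.getD []) ∈ gmap.take n.toNat := by
    have : gmap[a]? = some gmap[a] := List.getElem?_eq_getElem (by omega)
    rw [this]
    simp only [Option.getD_some]
    exact List.mem_take_iff_getElem.mpr ⟨a, by omega, by simp⟩
  exact hrows _ hmem
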